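/-
  THE VOCABULARY OF THE GIFLIB PROOF (giflib 6.1.3: dgif_lib.c, gifalloc.c, openbsd-reallocarray.c, the driver gif_driver.c; c/gif).
  ONE FILE: every contract (Gif/Spec/<Group>.lean), every cut assertion and every proof speaks in these words and in no others.
  The design it implements: design/INVARIANTS.md (clause names in brackets), design/CONTRACTS.md. Field offsets and typed reads:
  Gif/Spec/Off.lean (generated from the build's layout table), `rd mem a n`: Gif/Spec/Mem.lean.

  §1  THE GHOSTS
      Rd                         the reader: the address `cur` of the driver's `struct mem_cursor` (a stack object of gif_decode),
                                 the input `[inB, inB + inN)`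
      Map, Blk, Exts, Img, Saved, Forest
                                 THE OWNERSHIP FOREST: which heap object every pointer field of the decoder's data owns —
                                 gif (GifFileType), pv (the private object), scm (SColorMap), icm (Image.ColorMap), saved (the
                                 SavedImages array, its counted slots, each with its colour map, raster, extension list), pend (the
                                 pending extension list GifFile->ExtensionBlocks). Sizes are EXACT sizes (`H.Live p n`); the capacity of
                                 an object is the heap's business (`H.Live p n ↔ ∃ c, H.LiveCap p n c`: a caller of `realloc` takes `c` from it)
      F.owned                    the objects of the forest, `(base, size)`, in a fixed order
  §2  Owns H objs                every object of the list is LIVE in `H`, and no two have the same base [G1 G2 FO1]. With the heap's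
                                 invariant two objects with different bases are ≥ 64 bytes apart [FO2]: `Owns.apart`
  §3  THE SHAPE IN MEMORY
      MapAt m p mem              the pointer `p` is 0 (`m = none`) or the map `m`, whose fields agree [CM1-CM3]
      ExtsAt e p c mem           the pointer / count pair is (0, 0) or the list `e`, whose counted blocks agree [EX1 EX2]
      ImgAt slot g mem           the SavedImage at `slot` agrees with `g` [SV3 SV4]
      SavedAt s p c mem          the pointer / count pair is (0, 0) or the array `s`, whose counted slots agree [SV1 SV2]
  §4  GifOK H F R mem            THE STATE INVARIANT: `Owns H F.owned`, the fields of gif agree with `F`, `pv.Read = &mem_read`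
                                 [PR1], `pv.File = 0` [PR2], `pv.FileState = FILE_STATE_READ` [PR3], `gif.UserData = R.cur` [RD3],
                                 the cursor lies in the input [RD1], the image constants [K1]. NO LZW clause: see `LZOK`
      F.Complete, CloseOK        every counted image has its raster: what EVERY return of DGifSlurp guarantees, all DGifCloseFile needs
      LZOK mem pv                THE LZW FIELD RANGES [LZ1-LZ6, the needed forms]. A clause of the decode-time contracts (from a
                                 successful DGifSetupDecompress on), NOT of `GifOK`: it is FALSE between DGifOpen and the first image
                                 (all fields 0: `RunningCode = 0`)
      Ctx rest frames R          THE MEMORY-INDEPENDENT CONTEXT a caller carries unchanged: the cursor is a stack object of an active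
                                 protected frame, the input lies inside one object of `rest`, the image's four constants are in `rest`
      Env, Back                  the common precondition `HeapPre ∧ Ctx ∧ GifOK`; the common postcondition of a function that
                                 allocates and frees nothing: `HeapInv` for the same heap, `GifOK` for the same forest, `rem` not increased
      rem R mem, mu R mem pv     THE TERMINATION MEASURES: the input bytes left; `8·rem + 8·Buf[0] + CrntShiftState` (the LZW main loop)
  §5  THE FRAME LEMMAS, ONCE
      F.wins R                   every window of memory `GifOK` reads
      GifOK.frame                a memory that agrees on those windows keeps `GifOK`
      Loose H F R w              a window a store may hit without harm: off the heap's used part, the cursor and the constants; the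
                                 scalar fields of gif; the body of pv (`[pv + 4, pv + 64)`, `[pv + 80, pv + 24936)`); a DATA object of
                                 the forest (a raster, a colour array, the bytes of a block)
      GifOK.sameExcept           a footprint of loose windows keeps `GifOK`
      LZOK.frame                 `LZOK` reads `[pv + 8, pv + 48)`
  §6  THE FOUR TABLES OF pv: every access INSIDE ITS OWN ARRAY (the sanitizer sees one object; this proof does not)
      bufLive, stackLive, suffixLive, prefixLive
                                 `LiveIn` of element `i` of `Buf[256]`, `Stack[4095]`, `Suffix[4096]`, `Prefix[4096]`, from `i <` THE
                                 ARRAY'S OWN COUNT. design/TABLES.md says how the end theorem exports this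
  §7  A PROTECTED FRAME OVER THE HEAP'S INVARIANT: `HeapInv.prologue_ra`, `HeapInv.epilogue_ra` (the shadow layer's lemmas, lifted)
  The malloc / free / realloc STEPS OF THE FOREST: Gif/Spec/ForestCarry.lean.
-/
import ProgX.Base.Spec.Libc
import ProgX.Base.Spec.Heap
import ProgX.Spec.Common
import Gif.Spec.Runtime
import Gif.Spec.Off
import Gif.Frames
import Gif.Code
import Gif.Dec.All
namespace Gif.Spec
open X86 X86.User Asan ProgX.Base ProgX.Base.Spec

/-! ### 1. The ghosts -/

/-- **The reader**, as ghost state: where the driver's `struct mem_cursor` is, and the input it walks. -/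
structure Rd where
  /-- the address of the cursor object (`gif->UserData`): 16 bytes, `cur` at 0, `end` at 8 -/
  cur : Nat
  /-- the first byte of the input -/
  inB : Nat
  /-- the length of the input -/
  inN : Nat

/-- **A colour map**: the `ColorMapObject` and its `Colors` array of `count` entries of 3 bytes. -/
structure Map where
  obj : Nat
  colors : Nat
  count : Nat

/-- **One extension block**: its `Bytes` pointer (0 after a failed allocation: design F-2, X3) and its `ByteCount`. -/
structure Blk where
  bytes : Nat
  len : Nat

/-- **An extension list**: the array object of `cap` slots of 24 bytes, and its counted blocks. -/
structure Exts where
  arr : Nat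
  cap : Nat
  blocks : List Blk

/-- **A saved image**: its colour map (a deep copy), its raster `(base, size)`, its extension list. -/
structure Img where
  cm : Option Map
  raster : Option (Nat × Nat)
  ext : Option Exts

/-- **The SavedImages array**: the array object of `cap` slots of 56 bytes, and its counted images. -/
structure Saved where
  arr : Nat
  cap : Nat
  imgs : List Img

/-- **THE OWNERSHIP FOREST.** -/
structure Forest where
  gif : Nat
  pv : Nat
  scm : Option Map
  icm : Option Map
  saved : Option Saved
  pend : Option Exts

/-- The two objects of a colour map. -/
def Map.objs : Option Map → List (Nat × Nat)
  | none => []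
  | some m => [(m.obj, 24), (m.colors, 3 * m.count)]

/-- The object of a block: none if the allocation of its bytes failed. -/
def Blk.objs (b : Blk) : List (Nat × Nat) := if b.bytes = 0 then [] else [(b.bytes, b.len)]

/-- The objects of an extension list: the array, then the bytes of every counted block. -/
def Exts.objs : Option Exts → List (Nat × Nat)
  | none => []
  | some e => (e.arr, 24 * e.cap) :: e.blocks.flatMap Blk.objs

/-- The object of a raster. -/
def rasterObjs : Option (Nat × Nat) → List (Nat × Nat)
  | none => []
  | some r => [r]

/-- The objects of one saved image. -/
def Img.objs (g : Img) : List (Nat × Nat) := Map.objs g.cm ++ rasterObjs g.raster ++ Exts.objs g.ext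

/-- The objects of the SavedImages array: the array, then the objects of every counted image. -/
def Saved.objs : Option Saved → List (Nat × Nat)
  | none => []
  | some s => (s.arr, 56 * s.cap) :: s.imgs.flatMap Img.objs

/-- **The objects of the forest**, `(base, size)`. -/
def Forest.owned (F : Forest) : List (Nat × Nat) :=
  (F.gif, 120) :: (F.pv, 24936) :: (Map.objs F.scm ++ Map.objs F.icm ++ Saved.objs F.saved ++ Exts.objs F.pend)

/-- **Every counted image has its raster** (what holds at every return of DGifSlurp: design SV4). -/
def Forest.Complete (F : Forest) : Prop :=
  ∀ s, F.saved = some s → ∀ g, g ∈ s.imgs → g.raster ≠ none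

/-! ### 2. Owning heap objects -/

/-- **Every object of the list is live in `H`, and no two have the same base.** -/
structure Owns (H : Heap) (objs : List (Nat × Nat)) : Prop where
  live : ∀ o, o ∈ objs → H.Live o.1 o.2
  apart : objs.Pairwise (fun a b => a.1 ≠ b.1)

namespace Owns
variable {H : Heap} {objs objs' : List (Nat × Nat)} {mem : Mem}

/-- Nothing is owned. -/
theorem nil (H : Heap) : Owns H [] :=
  ⟨fun _ h => absurd h List.not_mem_nil, List.Pairwise.nil⟩

/-- A permutation of the list. -/
theorem perm (h : Owns H objs) (hp : objs.Perm objs') : Owns H objs' := by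
  refine ⟨?_, ?_⟩
  · intro o ho
    exact h.live o (hp.symm.subset ho)
  · exact (hp.pairwise_iff (fun hab => Ne.symm hab)).mp h.apart

/-- A sublist (some objects are given away). -/
theorem sublist (h : Owns H objs) (hs : objs'.Sublist objs) : Owns H objs' :=
  ⟨fun o ho => h.live o (hs.subset ho), h.apart.sublist hs⟩

/-- The first object, and the others. -/
theorem of_cons {o : Nat × Nat} (h : Owns H (o :: objs)) : H.Live o.1 o.2 ∧ Owns H objs ∧ ∀ x, x ∈ objs → o.1 ≠ x.1 := by
  obtain ⟨k1, k2⟩ := List.pairwise_cons.mp h.apart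
  exact ⟨h.live o List.mem_cons_self, ⟨fun x hx => h.live x (List.mem_cons_of_mem _ hx), k2⟩, k1⟩

/-- One more object, with a base no other has. -/
theorem cons {o : Nat × Nat} (h : Owns H objs) (hl : H.Live o.1 o.2) (hne : ∀ x, x ∈ objs → o.1 ≠ x.1) :
    Owns H (o :: objs) := by
  refine ⟨?_, List.pairwise_cons.mpr ⟨hne, h.apart⟩⟩
  intro x hx
  rcases List.mem_cons.mp hx with rfl | hin
  · exact hl
  · exact h.live x hin

/-- Two owned objects with different positions in the list have different bases; the useful form: an element and another
element that is not equal to it. -/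
theorem base_ne (h : Owns H objs) {a b : Nat × Nat} (ha : a ∈ objs) (hb : b ∈ objs) (hne : a ≠ b) : a.1 ≠ b.1 := by
  intro e
  have key : ∀ (l : List (Nat × Nat)), l.Pairwise (fun x y => x.1 ≠ y.1) → a ∈ l → b ∈ l → False := by
    intro l hl
    induction l with
    | nil =>
      intro hin
      exact absurd hin List.not_mem_nil
    | cons x rest ih =>
      intro hin hin'
      obtain ⟨hx, hrest⟩ := List.pairwise_cons.mp hl
      rcases List.mem_cons.mp hin with e1 | hr
      · rcases List.mem_cons.mp hin' with e2 | hr'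
        · exact hne (e1.trans e2.symm)
        · subst e1
          exact hx b hr' e
      · rcases List.mem_cons.mp hin' with e2 | hr'
        · subst e2
          exact hx a hr e.symm
        · exact ih hrest hr hr'
  exact key objs h.apart ha hb

/-- **An allocation keeps what is owned.** -/
theorem push (h : Owns H objs) (n c : Nat) : Owns (H.push n c) objs :=
  ⟨fun o ho => (h.live o ho).push n c, h.apart⟩

/-- **The new object of an allocation can be owned too**: its base is above every object there is (never re-use). -/
theorem push_cons (h : Owns H objs) (hok : HeapOK H mem) (n c : Nat) : Owns (H.push n c) ((H.next, n) :: objs) := by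
  refine (h.push n c).cons (Heap.live_push H n c) ?_
  intro x hx e
  obtain ⟨cx, hlx⟩ := h.live x hx
  have := hok.next_above hlx
  simp only at this e
  omega

/-- **`free(p)` of the first object keeps the others.** -/
theorem release_head {p n : Nat} (h : Owns H ((p, n) :: objs)) : Owns (H.release p) objs := by
  obtain ⟨_, hrest, hne⟩ := h.of_cons
  refine ⟨?_, hrest.apart⟩
  intro o ho
  exact (hrest.live o ho).release_ne (fun e => hne o ho e.symm)

/-- **`free(p)` of any owned object keeps the others** (the list without it, in any order). -/
theorem release {p n : Nat} (h : Owns H objs) (hp : objs.Perm ((p, n) :: objs')) : Owns (H.release p) objs' :=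
  (h.perm hp).release_head

/-- **An in-place `realloc(p, m)` of the first object**: it is owned with its new size, the others are kept. -/
theorem resize_head {p n : Nat} (h : Owns H ((p, n) :: objs)) (m : Nat) : Owns (H.resize p m) ((p, m) :: objs) := by
  obtain ⟨hl, hrest, hne⟩ := h.of_cons
  refine ⟨?_, List.pairwise_cons.mpr ⟨hne, hrest.apart⟩⟩
  intro o ho
  rcases List.mem_cons.mp ho with rfl | hin
  · exact Heap.live_resize hl m
  · exact (hrest.live o hin).resize_ne (fun e => hne o hin e.symm) m

/-- **Where an owned object is**: in the heap's region, 16-aligned, off the stack, off every image. -/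
theorem inside (h : Owns H objs) (hok : HeapOK H mem) {o : Nat × Nat} (ho : o ∈ objs) :
    H.base + 64 ≤ o.1 ∧ o.1 + o.2 + 32 ≤ H.base + 32 + H.used ∧ o.1 % 16 = 0 ∧ 0x200040 ≤ o.1 ∧ o.1 + o.2 + 32 ≤ 0xC00000 := by
  obtain ⟨c, hl⟩ := h.live o ho
  have h1 := hok.obj_range hl
  have h2 := hok.obj_inside hl
  have h3 := hok.obj_aligned hl
  have h4 := hok.size_le_cap hl
  simp only at h1 h2 h3 h4
  omega

/-- **Two owned objects are the same entry or at least 64 bytes apart** [FO2]. -/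
theorem far (h : Owns H objs) (hok : HeapOK H mem) {a b : Nat × Nat} (ha : a ∈ objs) (hb : b ∈ objs) (hne : a ≠ b) :
    a.1 + a.2 + 64 ≤ b.1 ∨ b.1 + b.2 + 64 ≤ a.1 := by
  obtain ⟨ca, hla⟩ := h.live a ha
  obtain ⟨cb, hlb⟩ := h.live b hb
  have hbase := h.base_ne ha hb hne
  have hap := hok.apart_of_base_ne hla hlb hbase
  have hsa := hok.size_le_cap hla
  have hsb := hok.size_le_cap hlb
  simp only at hap hsa hsb
  omega

end Owns

/-! ### 3. The shape in memory -/

/-- **A colour-map pointer field**: 0, or the map `m` whose `ColorCount` and `Colors` fields agree [CM1]. -/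
def MapAt (m : Option Map) (p : Nat) (mem : Mem) : Prop :=
  match m with
  | none => p = 0
  | some m =>
    p = m.obj ∧
    ColorMapObject.ColorCount mem m.obj = m.count ∧
    ColorMapObject.Colors mem m.obj = m.colors ∧
    1 ≤ m.count ∧ m.count ≤ 256

/-- **One counted extension block** at the address `a`: `ByteCount` and `Bytes` agree; a block has 1 … 255 bytes. -/
def BlkAt (a : Nat) (b : Blk) (mem : Mem) : Prop :=
  ExtensionBlock.ByteCount mem a = b.len ∧ ExtensionBlock.Bytes mem a = b.bytes ∧ 1 ≤ b.len ∧ b.len ≤ 255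

/-- **An extension-list pointer / count pair**: `(0, 0)`, or the list `e` whose counted blocks agree [EX1 EX2]. -/
def ExtsAt (e : Option Exts) (p c : Nat) (mem : Mem) : Prop :=
  match e with
  | none => p = 0 ∧ c = 0
  | some e =>
    p = e.arr ∧ c = e.blocks.length ∧ e.blocks.length ≤ e.cap ∧
    ∀ i (h : i < e.blocks.length), BlkAt (e.arr + 24 * i) e.blocks[i] mem

/-- **A raster pointer field** of the SavedImage at `slot`: 0, or the raster `(r, n)` with `n = Width · Height`, both at least 1,
the product an `int` [SV4]. -/
def RasterAt (r : Option (Nat × Nat)) (slot : Nat) (mem : Mem) : Prop :=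
  match r with
  | none => SavedImage.RasterBits mem slot = 0
  | some r =>
    SavedImage.RasterBits mem slot = r.1 ∧
    r.2 = SavedImage.ImageDesc.Width mem slot * SavedImage.ImageDesc.Height mem slot ∧
    1 ≤ SavedImage.ImageDesc.Width mem slot ∧ 1 ≤ SavedImage.ImageDesc.Height mem slot ∧ r.2 < 2 ^ 31

/-- **One counted SavedImage** at the address `slot` agrees with `g` [SV3]. -/
structure ImgAt (slot : Nat) (g : Img) (mem : Mem) : Prop where
  cm : MapAt g.cm (SavedImage.ImageDesc.ColorMap mem slot) mem
  raster : RasterAt g.raster slot mem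
  ext : ExtsAt g.ext (SavedImage.ExtensionBlocks mem slot) (SavedImage.ExtensionBlockCount mem slot) mem

/-- **The SavedImages pointer / ImageCount pair**: `(0, 0)` [SV1], or the array `s` whose counted slots agree [SV2 SV3]. Slots
`≥ length` are unconstrained bytes. -/
def SavedAt (s : Option Saved) (p c : Nat) (mem : Mem) : Prop :=
  match s with
  | none => p = 0 ∧ c = 0
  | some s =>
    p = s.arr ∧ c = s.imgs.length ∧ s.imgs.length ≤ s.cap ∧ 1 ≤ s.cap ∧
    ∀ k (h : k < s.imgs.length), ImgAt (s.arr + 56 * k) s.imgs[k] mem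

/-! ### 4. The state invariant -/

/-- The bytes the reader has not handed out yet: `end − cur` of the cursor. -/
def rem (R : Rd) (mem : Mem) : Nat := mem_cursor.end mem R.cur - mem_cursor.cur mem R.cur

/-- **The cursor lies in the input** [RD1]: `inB ≤ cur ≤ end = inB + inN`. -/
structure CursorOK (R : Rd) (mem : Mem) : Prop where
  lo : R.inB ≤ mem_cursor.cur mem R.cur
  le : mem_cursor.cur mem R.cur ≤ mem_cursor.end mem R.cur
  hi : mem_cursor.end mem R.cur = R.inB + R.inN

/-- **The image's constants** [K1]: `CodeMasks[k] = 2^k − 1` for `k ≤ 12` (13 × u16 at 141380H), `InterlacedOffset = {0, 4, 2, 1}`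
(141340H), `InterlacedJumps = {8, 8, 4, 2}` (141300H). -/
structure Consts (mem : Mem) : Prop where
  masks : ∀ k, k ≤ 12 → rd mem (0x141380 + 2 * k) 2 = 2 ^ k - 1
  offs : rd mem 0x141340 4 = 0 ∧ rd mem 0x141344 4 = 4 ∧ rd mem 0x141348 4 = 2 ∧ rd mem 0x14134c 4 = 1
  jumps : rd mem 0x141300 4 = 8 ∧ rd mem 0x141304 4 = 8 ∧ rd mem 0x141308 4 = 4 ∧ rd mem 0x14130c 4 = 2

/-- The entry of the driver's reader, as a number (`Gif.L.mem_read.entry`): what `pv.Read` holds. -/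
def memReadEntry : Nat := 0x105c60

theorem memReadEntry_eq : (UInt64.ofNat memReadEntry : Word) = Gif.L.mem_read.entry := by decide

/-- **THE SHAPE OF THE DECODER'S DATA IN MEMORY**: the half of the state invariant that reads memory and does not mention the
heap. It says which VALUES the pointer and count fields hold; that the objects they name are live is `Owns` (the other half). A
pointer that DANGLES after a `free` (between the call and the store of NULL: design CONTRACTS 11, 18, 20) still satisfies it. -/
structure Shape (F : Forest) (R : Rd) (mem : Mem) : Prop where
  /-- [G2] `gif.Private = pv` -/
  priv : GifFileType.Private mem F.gif = F.pv
  /-- [RD3] `gif.UserData = &cursor` -/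
  user : GifFileType.UserData mem F.gif = R.cur
  /-- [CM2] -/
  scm : MapAt F.scm (GifFileType.SColorMap mem F.gif) mem
  /-- [CM3] -/
  icm : MapAt F.icm (GifFileType.Image.ColorMap mem F.gif) mem
  /-- [SV1-SV4] -/
  saved : SavedAt F.saved (GifFileType.SavedImages mem F.gif) (GifFileType.ImageCount mem F.gif) mem
  /-- [EX1 EX2] -/
  pend : ExtsAt F.pend (GifFileType.ExtensionBlocks mem F.gif) (GifFileType.ExtensionBlockCount mem F.gif) mem
  /-- [PR1] the indirect call of InternalRead lands on `mem_read` -/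
  read : GifFilePrivateType.Read mem F.pv = memReadEntry
  /-- [PR2] `fclose` is never called -/
  file : GifFilePrivateType.File mem F.pv = 0
  /-- [PR3] FILE_STATE_READ: `IS_READABLE` is true -/
  state : GifFilePrivateType.FileState mem F.pv = 8
  /-- [RD1] -/
  cursor : CursorOK R mem
  /-- [K1] -/
  consts : Consts mem

/-- **THE STATE INVARIANT** of the decoder between two calls of its API: every object of the forest is live and no two are the
same [G1 G2 FO1]; the data in memory has the forest's shape. The two halves move separately: a heap function changes `owns`
(`Owns.push`, `Owns.release`, `Owns.resize_head`) and keeps `shape` by its footprint (`Shape.sameExcept`); a store to a pointer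
field changes `shape` (Gif/Spec/ForestCarry.lean) and keeps `owns`. -/
structure GifOK (H : Heap) (F : Forest) (R : Rd) (mem : Mem) : Prop where
  owns : Owns H F.owned
  shape : Shape F R mem

/-- **What every return of DGifSlurp guarantees, and all DGifCloseFile (and the digest) needs.** -/
structure CloseOK (H : Heap) (F : Forest) (R : Rd) (mem : Mem) : Prop where
  ok : GifOK H F R mem
  complete : F.Complete

/-- **THE LZW FIELD RANGES** of the private object at `pv` (the NEEDED forms of design LZ1-LZ6; all values are unsigned reads, so
"not negative" is part of every clause). Nothing is said about the CONTENTS of `Buf`, `Stack`, `Suffix`, `Prefix`, about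
`LastCode`, `MaxCode1`, `CrntShiftDWord`: no access depends on them. -/
structure LZOK (mem : Mem) (pv : Nat) : Prop where
  /-- [LZ1] -/
  bpp : GifFilePrivateType.BitsPerPixel mem pv ≤ 8
  /-- [LZ2] -/
  clear : GifFilePrivateType.ClearCode mem pv ≤ 256
  eof : GifFilePrivateType.EOFCode mem pv = GifFilePrivateType.ClearCode mem pv + 1
  /-- [LZ3] `RunningCode − 2` is an index of `Suffix[4096]` and `Prefix[4096]` -/
  code_lo : GifFilePrivateType.ClearCode mem pv + 2 ≤ GifFilePrivateType.RunningCode mem pv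
  code_hi : GifFilePrivateType.RunningCode mem pv ≤ 4097
  /-- [LZ4] `RunningBits` is an index of `CodeMasks[13]`, and at least 1 (the measure) -/
  bits_lo : GifFilePrivateType.BitsPerPixel mem pv + 1 ≤ GifFilePrivateType.RunningBits mem pv
  bits_hi : GifFilePrivateType.RunningBits mem pv ≤ 12
  /-- [LZ5] `StackPtr` is a fill level of `Stack[4095]` -/
  sp : GifFilePrivateType.StackPtr mem pv ≤ 4095
  /-- [LZ6] stable under the success and the error return of DGifDecompressInput -/
  shift : GifFilePrivateType.CrntShiftState mem pv ≤ 11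

/-- **The measure of the LZW main loop** (design INVARIANTS §6): `8·rem + 8·Buf[0] + CrntShiftState`. A successful
DGifDecompressInput lowers it by `RunningBits ≥ 1`; a clear code does not advance the output index, so that is no measure. -/
def mu (R : Rd) (mem : Mem) (pv : Nat) : Nat :=
  8 * rem R mem + 8 * rd mem (pv + 88) 1 + GifFilePrivateType.CrntShiftState mem pv

/-- **THE MEMORY-INDEPENDENT CONTEXT**: what a function on the path knows besides the heap and the memory, and hands to its callees
unchanged (with more frames: `Ctx.push`). -/
structure Ctx (rest : List Obj) (frames : List (Nat × FrameLayout)) (R : Rd) : Prop where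
  /-- [RD1] the cursor is a stack object of an active protected frame (gif_decode's) -/
  cursor : (⟨R.cur, 16, .stack⟩ : Obj) ∈ stackObjs frames
  /-- [RD2] the input lies inside ONE object that is neither a stack object nor a heap object -/
  input : R.inN = 0 ∨ LiveIn rest [] R.inB R.inN
  /-- [K1] the three tables and the literal "GIFVER" are registered globals -/
  masks : Gif.Globals.CodeMasks.obj ∈ rest
  offs : Gif.Globals.InterlacedOffset.obj ∈ rest
  jumps : Gif.Globals.InterlacedJumps.obj ∈ rest
  stamp : Gif.Globals.LC7.obj ∈ rest

/-- The context of a callee of a protected function: one more active frame. -/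
theorem Ctx.push {rest : List Obj} {frames : List (Nat × FrameLayout)} {R : Rd} (h : Ctx rest frames R) (base : Nat)
    (F : FrameLayout) : Ctx rest ((base, F) :: frames) R := by
  refine ⟨?_, h.input, h.masks, h.offs, h.jumps, h.stamp⟩
  rw [stackObjs_cons]
  exact List.mem_append_right _ h.cursor

/-- **THE COMMON PRECONDITION** of the functions on the path: the heap's (`HeapPre`: its invariant with the clean stack ending at
`rsp + 8`), the context, the state invariant. -/
structure Env (H : Heap) (rest : List Obj) (frames : List (Nat × FrameLayout)) (F : Forest) (R : Rd) (u : State) : Prop where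
  heap : HeapPre H rest frames u
  ctx : Ctx rest frames R
  ok : GifOK H F R u.mem

/-- **THE COMMON POSTCONDITION** of a function that allocates and frees nothing and moves no ownership: at the returned state `v`
the heap's invariant holds for the SAME heap (with the clean stack ending at the caller's stack pointer), the state invariant for
the SAME forest, and the reader did not go back. -/
structure Back (H : Heap) (rest : List Obj) (frames : List (Nat × FrameLayout)) (F : Forest) (R : Rd) (u v : State) : Prop where
  inv : HeapInv H rest frames ((u.reg .rsp).toNat + 8) v.mem
  ok : GifOK H F R v.mem
  rem : rem R v.mem ≤ rem R u.mem

/-- **The heap of a post is at the place of the heap of the pre** (what `HeapPre.of_inv` asks to give `HeapPre` again). -/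
def SameRegion (H H' : Heap) : Prop := H'.base = H.base ∧ H'.limit = H.limit

theorem SameRegion.refl (H : Heap) : SameRegion H H := ⟨rfl, rfl⟩

theorem SameRegion.trans {H H' H'' : Heap} (h1 : SameRegion H H') (h2 : SameRegion H' H'') : SameRegion H H'' :=
  ⟨h2.1.trans h1.1, h2.2.trans h1.2⟩

theorem SameRegion.push (H : Heap) (n c : Nat) : SameRegion H (H.push n c) := ⟨rfl, rfl⟩
theorem SameRegion.release (H : Heap) (p : Nat) : SameRegion H (H.release p) := ⟨rfl, rfl⟩
theorem SameRegion.resize (H : Heap) (p m : Nat) : SameRegion H (H.resize p m) := ⟨rfl, rfl⟩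

/-- `HeapPre` for the heap of a post, at a state with the invariant. -/
theorem SameRegion.heapPre {H H' : Heap} {rest : List Obj} {frames : List (Nat × FrameLayout)} {u v : State}
    (hs : SameRegion H H') (h : HeapPre H rest frames u) (hinv : HeapInv H' rest frames ((v.reg .rsp).toNat + 8) v.mem) :
    HeapPre H' rest frames v :=
  h.of_inv hinv hs.1 hs.2

/-! ### 5. The frame lemmas -/

/-- The structural part of a colour map: the `ColorMapObject` (its `Colors` array is DATA). -/
def Map.structs : Option Map → List (Nat × Nat)
  | none => []
  | some m => [(m.obj, 24)]

/-- The structural part of an extension list: the counted blocks of the array (the bytes of a block are DATA). -/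
def Exts.structs : Option Exts → List (Nat × Nat)
  | none => []
  | some e => [(e.arr, 24 * e.blocks.length)]

/-- The structural parts of one saved image (its slot belongs to the array). -/
def Img.structs (g : Img) : List (Nat × Nat) := Map.structs g.cm ++ Exts.structs g.ext

/-- The structural parts of the SavedImages array: its counted slots, and the structural parts of every counted image. -/
def Saved.structs : Option Saved → List (Nat × Nat)
  | none => []
  | some s => (s.arr, 56 * s.imgs.length) :: s.imgs.flatMap Img.structs

/-- **THE STRUCTURAL WINDOWS of the forest besides gif and pv**, `(base, length)`: every byte `MapAt`, `ExtsAt`, `SavedAt` read lies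
in one of them; each is a PREFIX of an owned object (`structs_owned`). -/
def Forest.structs (F : Forest) : List (Nat × Nat) :=
  Map.structs F.scm ++ Map.structs F.icm ++ Saved.structs F.saved ++ Exts.structs F.pend

/-- **The memory `mem'` agrees with `mem` on everything `Shape F R` reads**: the pointer and count fields of gif (`[24, 40)`:
SColorMap, ImageCount; `[64, 96)`: Image.ColorMap, SavedImages, ExtensionBlockCount, ExtensionBlocks; `[104, 120)`: UserData,
Private), `FileState`, `File` and `Read` of pv, the cursor, the constants, the structural windows. -/
structure Forest.Kept (F : Forest) (R : Rd) (mem mem' : Mem) : Prop where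
  gif1 : Mem.EqOn (F.gif + 24) (F.gif + 40) mem mem'
  gif2 : Mem.EqOn (F.gif + 64) (F.gif + 96) mem mem'
  gif3 : Mem.EqOn (F.gif + 104) (F.gif + 120) mem mem'
  pv1 : Mem.EqOn F.pv (F.pv + 4) mem mem'
  pv2 : Mem.EqOn (F.pv + 64) (F.pv + 80) mem mem'
  cursor : Mem.EqOn R.cur (R.cur + 16) mem mem'
  consts : Mem.EqOn 0x141300 0x14139a mem mem'
  structs : ∀ o, o ∈ F.structs → Mem.EqOn o.1 (o.1 + o.2) mem mem'

/-- A colour-map field through a memory that agrees on the pointer's value and on the map object. -/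
theorem MapAt.frame {m : Option Map} {p : Nat} {mem mem' : Mem} (h : MapAt m p mem)
    (hk : ∀ o, o ∈ Map.structs m → Mem.EqOn o.1 (o.1 + o.2) mem mem') (hlt : ∀ x, m = some x → x.obj + 24 < 2 ^ 64) :
    MapAt m p mem' := by
  cases m with
  | none => exact h
  | some x =>
    obtain ⟨k1, k2, k3, k4, k5⟩ := h
    have he := hk (x.obj, 24) (by simp only [Map.structs, List.mem_singleton])
    have hl := hlt x rfl
    simp only at he
    refine ⟨k1, ?_, ?_, k4, k5⟩
    · simp only [gfield] at k2 ⊢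
      rw [he.rd x.obj 4 (by omega) (by omega) (by omega)]
      exact k2
    · simp only [gfield] at k3 ⊢
      rw [he.rd (x.obj + 16) 8 (by omega) (by omega) (by omega)]
      exact k3

/-- An extension-list field pair through a memory that agrees on the counted blocks. -/
theorem ExtsAt.frame {e : Option Exts} {p c : Nat} {mem mem' : Mem} (h : ExtsAt e p c mem)
    (hk : ∀ o, o ∈ Exts.structs e → Mem.EqOn o.1 (o.1 + o.2) mem mem')
    (hlt : ∀ x, e = some x → x.arr + 24 * x.blocks.length < 2 ^ 64) : ExtsAt e p c mem' := by
  cases e with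
  | none => exact h
  | some x =>
    obtain ⟨k1, k2, k3, k4⟩ := h
    have he := hk (x.arr, 24 * x.blocks.length) (by simp only [Exts.structs, List.mem_singleton])
    have hl := hlt x rfl
    simp only at he
    refine ⟨k1, k2, k3, ?_⟩
    intro i hi
    obtain ⟨j1, j2, j3, j4⟩ := k4 i hi
    refine ⟨?_, ?_, j3, j4⟩
    · simp only [gfield] at j1 ⊢
      rw [he.rd (x.arr + 24 * i) 4 (by omega) (by omega) (by omega)]
      exact j1
    · simp only [gfield] at j2 ⊢
      rw [he.rd (x.arr + 24 * i + 8) 8 (by omega) (by omega) (by omega)]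
      exact j2

/-- One counted SavedImage through a memory that agrees on its slot and on its structural parts. -/
theorem ImgAt.frame {slot : Nat} {g : Img} {mem mem' : Mem} (h : ImgAt slot g mem)
    (hslot : Mem.EqOn slot (slot + 56) mem mem') (hk : ∀ o, o ∈ Img.structs g → Mem.EqOn o.1 (o.1 + o.2) mem mem')
    (hlt : slot + 56 < 2 ^ 64) (hlt1 : ∀ x, g.cm = some x → x.obj + 24 < 2 ^ 64)
    (hlt2 : ∀ x, g.ext = some x → x.arr + 24 * x.blocks.length < 2 ^ 64) : ImgAt slot g mem' := by
  obtain ⟨k1, k2, k3⟩ := h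
  have e1 : SavedImage.ImageDesc.ColorMap mem' slot = SavedImage.ImageDesc.ColorMap mem slot := by
    simp only [gfield]
    exact hslot.rd (slot + 24) 8 (by omega) (by omega) (by omega)
  have e2 : SavedImage.RasterBits mem' slot = SavedImage.RasterBits mem slot := by
    simp only [gfield]
    exact hslot.rd (slot + 32) 8 (by omega) (by omega) (by omega)
  have e3 : SavedImage.ExtensionBlockCount mem' slot = SavedImage.ExtensionBlockCount mem slot := by
    simp only [gfield]
    exact hslot.rd (slot + 40) 4 (by omega) (by omega) (by omega)
  have e4 : SavedImage.ExtensionBlocks mem' slot = SavedImage.ExtensionBlocks mem slot := by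
    simp only [gfield]
    exact hslot.rd (slot + 48) 8 (by omega) (by omega) (by omega)
  have e5 : SavedImage.ImageDesc.Width mem' slot = SavedImage.ImageDesc.Width mem slot := by
    simp only [gfield]
    exact hslot.rd (slot + 8) 4 (by omega) (by omega) (by omega)
  have e6 : SavedImage.ImageDesc.Height mem' slot = SavedImage.ImageDesc.Height mem slot := by
    simp only [gfield]
    exact hslot.rd (slot + 12) 4 (by omega) (by omega) (by omega)
  refine ⟨?_, ?_, ?_⟩
  · rw [e1]
    apply k1.frame _ hlt1
    intro o ho
    exact hk o (List.mem_append_left _ ho)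
  · unfold RasterAt at k2 ⊢
    cases hr : g.raster with
    | none =>
      rw [hr] at k2
      simp only at k2 ⊢
      rw [e2]
      exact k2
    | some r =>
      rw [hr] at k2
      simp only at k2 ⊢
      rw [e2, e5, e6]
      exact k2
  · rw [e3, e4]
    apply k3.frame _ hlt2
    intro o ho
    exact hk o (List.mem_append_right _ ho)

/-- The SavedImages field pair through a memory that agrees on the counted slots and on the structural parts of every image. -/
theorem SavedAt.frame {s : Option Saved} {p c : Nat} {mem mem' : Mem} (h : SavedAt s p c mem)
    (hk : ∀ o, o ∈ Saved.structs s → Mem.EqOn o.1 (o.1 + o.2) mem mem')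
    (hlt : ∀ o, o ∈ Saved.structs s → o.1 + o.2 < 2 ^ 64) : SavedAt s p c mem' := by
  cases s with
  | none => exact h
  | some x =>
    obtain ⟨k1, k2, k3, k4, k5⟩ := h
    have hin0 : (x.arr, 56 * x.imgs.length) ∈ Saved.structs (some x) := by
      simp only [Saved.structs, List.mem_cons, true_or]
    have he := hk _ hin0
    have hl := hlt _ hin0
    simp only at he hl
    refine ⟨k1, k2, k3, k4, ?_⟩
    intro k hk'
    have hsub : ∀ o, o ∈ Img.structs x.imgs[k] → o ∈ Saved.structs (some x) := by
      intro o ho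
      simp only [Saved.structs, List.mem_cons, List.mem_flatMap]
      exact Or.inr ⟨x.imgs[k], List.getElem_mem hk', ho⟩
    apply (k5 k hk').frame (he.mono (by omega) (by omega))
    · intro o ho
      exact hk o (hsub o ho)
    · omega
    · intro m hm
      have := hlt (m.obj, 24) (hsub _ (by
        unfold Img.structs
        rw [hm]
        simp only [Map.structs, List.mem_append, List.mem_singleton, true_or]))
      exact this
    · intro e he'
      have := hlt (e.arr, 24 * e.blocks.length) (hsub _ (by
        unfold Img.structs
        rw [he']
        simp only [Exts.structs, List.mem_append, List.mem_singleton, or_true]))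
      exact this

/-- **THE FRAME LEMMA OF THE STATE INVARIANT**: a memory that agrees with `mem` on everything `Shape` reads keeps it. (Where the
structural windows are — below `2^64` — follows from `Owns` and the heap's invariant: `hlt`; `Shape.sameExcept` supplies it.) -/
theorem Shape.frame {F : Forest} {R : Rd} {mem mem' : Mem} (h : Shape F R mem) (hk : F.Kept R mem mem')
    (hlt : ∀ o, o ∈ F.structs → o.1 + o.2 < 2 ^ 64) (hg : F.gif + 120 < 2 ^ 64) (hp : F.pv + 24936 < 2 ^ 64)
    (hc : R.cur + 16 < 2 ^ 64) : Shape F R mem' := by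
  have f1 : GifFileType.SColorMap mem' F.gif = GifFileType.SColorMap mem F.gif := by
    simp only [gfield]
    exact hk.gif1.rd (F.gif + 24) 8 (by omega) (by omega) (by omega)
  have f2 : GifFileType.ImageCount mem' F.gif = GifFileType.ImageCount mem F.gif := by
    simp only [gfield]
    exact hk.gif1.rd (F.gif + 32) 4 (by omega) (by omega) (by omega)
  have f3 : GifFileType.Image.ColorMap mem' F.gif = GifFileType.Image.ColorMap mem F.gif := by
    simp only [gfield]
    exact hk.gif2.rd (F.gif + 64) 8 (by omega) (by omega) (by omega)
  have f4 : GifFileType.SavedImages mem' F.gif = GifFileType.SavedImages mem F.gif := by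
    simp only [gfield]
    exact hk.gif2.rd (F.gif + 72) 8 (by omega) (by omega) (by omega)
  have f5 : GifFileType.ExtensionBlockCount mem' F.gif = GifFileType.ExtensionBlockCount mem F.gif := by
    simp only [gfield]
    exact hk.gif2.rd (F.gif + 80) 4 (by omega) (by omega) (by omega)
  have f6 : GifFileType.ExtensionBlocks mem' F.gif = GifFileType.ExtensionBlocks mem F.gif := by
    simp only [gfield]
    exact hk.gif2.rd (F.gif + 88) 8 (by omega) (by omega) (by omega)
  have f7 : GifFileType.UserData mem' F.gif = GifFileType.UserData mem F.gif := by
    simp only [gfield]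
    exact hk.gif3.rd (F.gif + 104) 8 (by omega) (by omega) (by omega)
  have f8 : GifFileType.Private mem' F.gif = GifFileType.Private mem F.gif := by
    simp only [gfield]
    exact hk.gif3.rd (F.gif + 112) 8 (by omega) (by omega) (by omega)
  have hsub1 : ∀ o, o ∈ Map.structs F.scm → o ∈ F.structs := by
    intro o ho
    unfold Forest.structs
    exact List.mem_append_left _ (List.mem_append_left _ (List.mem_append_left _ ho))
  have hsub2 : ∀ o, o ∈ Map.structs F.icm → o ∈ F.structs := by
    intro o ho
    unfold Forest.structs
    exact List.mem_append_left _ (List.mem_append_left _ (List.mem_append_right _ ho))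
  have hsub3 : ∀ o, o ∈ Saved.structs F.saved → o ∈ F.structs := by
    intro o ho
    unfold Forest.structs
    exact List.mem_append_left _ (List.mem_append_right _ ho)
  have hsub4 : ∀ o, o ∈ Exts.structs F.pend → o ∈ F.structs := by
    intro o ho
    unfold Forest.structs
    exact List.mem_append_right _ ho
  refine ⟨?_, ?_, ?_, ?_, ?_, ?_, ?_, ?_, ?_, ?_, ?_⟩
  · rw [f8]
    exact h.priv
  · rw [f7]
    exact h.user
  · rw [f1]
    apply h.scm.frame (fun o ho => hk.structs o (hsub1 o ho))
    intro x hx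
    exact hlt (x.obj, 24) (hsub1 _ (by rw [hx]; simp only [Map.structs, List.mem_singleton]))
  · rw [f3]
    apply h.icm.frame (fun o ho => hk.structs o (hsub2 o ho))
    intro x hx
    exact hlt (x.obj, 24) (hsub2 _ (by rw [hx]; simp only [Map.structs, List.mem_singleton]))
  · rw [f4, f2]
    exact h.saved.frame (fun o ho => hk.structs o (hsub3 o ho)) (fun o ho => hlt o (hsub3 o ho))
  · rw [f6, f5]
    apply h.pend.frame (fun o ho => hk.structs o (hsub4 o ho))
    intro x hx
    exact hlt (x.arr, 24 * x.blocks.length) (hsub4 _ (by rw [hx]; simp only [Exts.structs, List.mem_singleton]))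
  · simp only [gfield]
    rw [hk.pv2.rd (F.pv + 72) 8 (by omega) (by omega) (by omega)]
    have := h.read
    simp only [gfield] at this
    exact this
  · simp only [gfield]
    rw [hk.pv2.rd (F.pv + 64) 8 (by omega) (by omega) (by omega)]
    have := h.file
    simp only [gfield] at this
    exact this
  · simp only [gfield]
    rw [hk.pv1.rd F.pv 4 (by omega) (by omega) (by omega)]
    have := h.state
    simp only [gfield] at this
    exact this
  · have c1 : mem_cursor.cur mem' R.cur = mem_cursor.cur mem R.cur := by
      simp only [gfield]
      exact hk.cursor.rd R.cur 8 (by omega) (by omega) (by omega)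
    have c2 : mem_cursor.end mem' R.cur = mem_cursor.end mem R.cur := by
      simp only [gfield]
      exact hk.cursor.rd (R.cur + 8) 8 (by omega) (by omega) (by omega)
    obtain ⟨k1, k2, k3⟩ := h.cursor
    refine ⟨?_, ?_, ?_⟩
    · rw [c1]
      exact k1
    · rw [c1, c2]
      exact k2
    · rw [c2]
      exact k3
  · obtain ⟨k1, k2, k3⟩ := h.consts
    refine ⟨?_, ?_, ?_⟩
    · intro k hk12
      rw [hk.consts.rd (0x141380 + 2 * k) 2 (by omega) (by omega) (by omega)]
      exact k1 k hk12
    · rw [hk.consts.rd 0x141340 4 (by omega) (by omega) (by omega), hk.consts.rd 0x141344 4 (by omega) (by omega) (by omega),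
        hk.consts.rd 0x141348 4 (by omega) (by omega) (by omega), hk.consts.rd 0x14134c 4 (by omega) (by omega) (by omega)]
      exact k2
    · rw [hk.consts.rd 0x141300 4 (by omega) (by omega) (by omega), hk.consts.rd 0x141304 4 (by omega) (by omega) (by omega),
        hk.consts.rd 0x141308 4 (by omega) (by omega) (by omega), hk.consts.rd 0x14130c 4 (by omega) (by omega) (by omega)]
      exact k3

/-- The reader's measure through a memory that agrees on the cursor. -/
theorem rem_frame {R : Rd} {mem mem' : Mem} (h : Mem.EqOn R.cur (R.cur + 16) mem mem') (hc : R.cur + 16 < 2 ^ 64) :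
    rem R mem' = rem R mem := by
  unfold rem
  simp only [gfield]
  rw [h.rd R.cur 8 (by omega) (by omega) (by omega), h.rd (R.cur + 8) 8 (by omega) (by omega) (by omega)]

/-- **`LZOK` reads `[pv + 8, pv + 48)`** (BitsPerPixel … CrntShiftState). -/
theorem LZOK.frame {mem mem' : Mem} {pv : Nat} (h : LZOK mem pv) (he : Mem.EqOn (pv + 8) (pv + 48) mem mem')
    (hp : pv + 48 < 2 ^ 64) : LZOK mem' pv := by
  have e1 : GifFilePrivateType.BitsPerPixel mem' pv = GifFilePrivateType.BitsPerPixel mem pv := by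
    simp only [gfield]
    exact he.rd (pv + 8) 4 (by omega) (by omega) (by omega)
  have e2 : GifFilePrivateType.ClearCode mem' pv = GifFilePrivateType.ClearCode mem pv := by
    simp only [gfield]
    exact he.rd (pv + 12) 4 (by omega) (by omega) (by omega)
  have e3 : GifFilePrivateType.EOFCode mem' pv = GifFilePrivateType.EOFCode mem pv := by
    simp only [gfield]
    exact he.rd (pv + 16) 4 (by omega) (by omega) (by omega)
  have e4 : GifFilePrivateType.RunningCode mem' pv = GifFilePrivateType.RunningCode mem pv := by
    simp only [gfield]
    exact he.rd (pv + 20) 4 (by omega) (by omega) (by omega)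
  have e5 : GifFilePrivateType.RunningBits mem' pv = GifFilePrivateType.RunningBits mem pv := by
    simp only [gfield]
    exact he.rd (pv + 24) 4 (by omega) (by omega) (by omega)
  have e6 : GifFilePrivateType.StackPtr mem' pv = GifFilePrivateType.StackPtr mem pv := by
    simp only [gfield]
    exact he.rd (pv + 40) 4 (by omega) (by omega) (by omega)
  have e7 : GifFilePrivateType.CrntShiftState mem' pv = GifFilePrivateType.CrntShiftState mem pv := by
    simp only [gfield]
    exact he.rd (pv + 44) 4 (by omega) (by omega) (by omega)
  obtain ⟨k1, k2, k3, k4, k5, k6, k7, k8, k9⟩ := h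
  refine ⟨?_, ?_, ?_, ?_, ?_, ?_, ?_, ?_, ?_⟩
  · rw [e1]
    exact k1
  · rw [e2]
    exact k2
  · rw [e3, e2]
    exact k3
  · rw [e2, e4]
    exact k4
  · rw [e4]
    exact k5
  · rw [e1, e5]
    exact k6
  · rw [e5]
    exact k7
  · rw [e6]
    exact k8
  · rw [e7]
    exact k9


/-! ### 5b. Where the objects of the forest are; loose windows -/

/-- **THE GEOMETRY OF A LIST OF OBJECTS**: each is (a prefix of the capacity of) an object of the heap — LIVE OR FREED —, and no two
have the same base. Unlike `Owns` it survives every transition of the heap (`free` and `realloc` change neither bases nor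
capacities): it is what the frame lemma of `Shape` needs, also while a freed pointer dangles. -/
structure Placed (H : Heap) (objs : List (Nat × Nat)) : Prop where
  at_ : ∀ o, o ∈ objs → ∃ x, x ∈ H.objs ∧ x.base = o.1 ∧ o.2 ≤ x.cap
  apart : objs.Pairwise (fun a b => a.1 ≠ b.1)

/-- What is owned is placed. -/
theorem Owns.placed {H : Heap} {objs : List (Nat × Nat)} {mem : Mem} (h : Owns H objs) (hok : HeapOK H mem) : Placed H objs := by
  refine ⟨?_, h.apart⟩
  intro o ho
  obtain ⟨c, hl⟩ := h.live o ho
  have hs := hok.size_le_cap hl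
  exact ⟨_, hl, rfl, hs⟩

namespace Placed
variable {H : Heap} {objs objs' : List (Nat × Nat)}

theorem sublist (h : Placed H objs) (hs : objs'.Sublist objs) : Placed H objs' :=
  ⟨fun o ho => h.at_ o (hs.subset ho), h.apart.sublist hs⟩

/-- An allocation moves nothing. -/
theorem push (h : Placed H objs) (n c : Nat) : Placed (H.push n c) objs := by
  refine ⟨?_, h.apart⟩
  intro o ho
  obtain ⟨x, hx, k1, k2⟩ := h.at_ o ho
  refine ⟨x, ?_, k1, k2⟩
  rw [Heap.push_objs]
  exact List.mem_cons_of_mem _ hx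

/-- `free` moves nothing. -/
theorem release (h : Placed H objs) (p : Nat) : Placed (H.release p) objs := by
  refine ⟨?_, h.apart⟩
  intro o ho
  obtain ⟨x, hx, k1, k2⟩ := h.at_ o ho
  refine ⟨Heap.releaseObj p x, ?_, ?_, ?_⟩
  · rw [Heap.release_objs]
    exact List.mem_map.mpr ⟨x, hx, rfl⟩
  · rw [releaseObj_base]
    exact k1
  · rw [releaseObj_cap]
    exact k2

/-- An in-place `realloc` moves nothing. -/
theorem resize (h : Placed H objs) (p m : Nat) : Placed (H.resize p m) objs := by
  refine ⟨?_, h.apart⟩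
  intro o ho
  obtain ⟨x, hx, k1, k2⟩ := h.at_ o ho
  refine ⟨Heap.resizeObj p m x, ?_, ?_, ?_⟩
  · rw [Heap.resize_objs]
    exact List.mem_map.mpr ⟨x, hx, rfl⟩
  · rw [resizeObj_base]
    exact k1
  · rw [resizeObj_cap]
    exact k2

end Placed

/-- **A GAP**: the window meets no byte of any object of the heap (live or freed: `[base, base + cap)`), nor the cursor, nor the
constants. The stack, the shadow, the output, a global; the heap's control cell, a chunk header, a red zone, the region above the
bump pointer. -/
def Gap (H : Heap) (R : Rd) (w : Span) : Prop :=
  (∀ x, x ∈ H.objs → w.hi ≤ x.base ∨ x.base + x.cap ≤ w.lo) ∧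
  (w.hi ≤ R.cur ∨ R.cur + 16 ≤ w.lo) ∧
  (w.hi ≤ 0x141300 ∨ 0x14139a ≤ w.lo)

/-- **A LOOSE WINDOW**: a store into it keeps `Shape F R`. One of:
  gap     `Gap H R w`;
  gif     the scalar fields of gif: `[0, 24)` (SWidth … AspectByte), `[40, 64)` (Image.Left … Interlace), `[96, 104)` (Error);
  pv      the body of pv: `[4, 64)` (FileHandle, the LZW scalars, CrntShiftDWord, PixelCount), `[80, 24936)` (Write, Buf, Stack, Suffix,
          Prefix, HashTable, gif89);
  data    inside the capacity of an object of the heap that is not gif, not pv, and no structural object of the forest: a raster, a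
          colour array, the bytes of a block, an object just allocated and not handed over yet;
  tail    inside the capacity of a structural object, behind the prefix of it that `Shape` reads (the uncounted slots of an array). -/
def Loose (H : Heap) (F : Forest) (R : Rd) (w : Span) : Prop :=
  Gap H R w ∨
  (F.gif ≤ w.lo ∧ w.hi ≤ F.gif + 24) ∨ (F.gif + 40 ≤ w.lo ∧ w.hi ≤ F.gif + 64) ∨ (F.gif + 96 ≤ w.lo ∧ w.hi ≤ F.gif + 104) ∨
  (F.pv + 4 ≤ w.lo ∧ w.hi ≤ F.pv + 64) ∨ (F.pv + 80 ≤ w.lo ∧ w.hi ≤ F.pv + 24936) ∨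
  (∃ x, x ∈ H.objs ∧ x.base ≤ w.lo ∧ w.hi ≤ x.base + x.cap ∧ x.base ≠ F.gif ∧ x.base ≠ F.pv ∧ ∀ o, o ∈ F.structs → o.1 ≠ x.base) ∨
  (∃ o x, o ∈ F.structs ∧ x ∈ H.objs ∧ x.base = o.1 ∧ o.1 + o.2 ≤ w.lo ∧ w.hi ≤ x.base + x.cap)

/-- **The window lies outside the used part of the heap's region, or inside the capacity of one object**: the side condition of
`HeapInv.sameExcept` (Asan/Heap.lean), named. -/
def HeapWin (H : Heap) (w : Span) : Prop :=
  (w.hi ≤ H.base ∨ H.base + 32 + H.used ≤ w.lo) ∨ ∃ x, x ∈ H.objs ∧ x.base ≤ w.lo ∧ w.hi ≤ x.base + x.cap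

/-- **The data objects of the forest**: the colour arrays, the rasters, the bytes of the blocks (everything owned that is not
gif, pv, a `ColorMapObject` or an array). -/
def Map.datas : Option Map → List (Nat × Nat)
  | none => []
  | some m => [(m.colors, 3 * m.count)]

def Exts.datas : Option Exts → List (Nat × Nat)
  | none => []
  | some e => e.blocks.flatMap Blk.objs

def Img.datas (g : Img) : List (Nat × Nat) := Map.datas g.cm ++ rasterObjs g.raster ++ Exts.datas g.ext

def Saved.datas : Option Saved → List (Nat × Nat)
  | none => []
  | some s => s.imgs.flatMap Img.datas

def Forest.datas (F : Forest) : List (Nat × Nat) :=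
  Map.datas F.scm ++ Map.datas F.icm ++ Saved.datas F.saved ++ Exts.datas F.pend

/-! How a list of owned objects splits into structural windows and data objects. -/

/-- **A list of objects `objs` splits into the structural windows `ss` and the data objects `ds`**: every data object IS an
entry of the list; the bases of the structural windows are, in order, bases of entries of the list; and if no base occurs twice
in the list, no structural window has the base of a data object (they sit at different positions). The lemmas below build it
along the constructors of the lists (`nil`, `datas`, `cons_struct`, `append`, `flatMap`). -/
structure SplitAux (objs ds ss : List (Nat × Nat)) : Prop where
  data : ∀ d, d ∈ ds → d ∈ objs
  sub : (ss.map Prod.fst).Sublist (objs.map Prod.fst)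
  ne : objs.Pairwise (fun a b => a.1 ≠ b.1) → ∀ d, d ∈ ds → ∀ o, o ∈ ss → o.1 ≠ d.1

namespace SplitAux
variable {A B dA dB sA sB : List (Nat × Nat)}

/-- The base of a structural window is the base of an entry of the list. -/
theorem struct (h : SplitAux A dA sA) {o : Nat × Nat} (ho : o ∈ sA) : ∃ n, (o.1, n) ∈ A := by
  have h1 : o.1 ∈ sA.map Prod.fst := List.mem_map.mpr ⟨o, ho, rfl⟩
  have h2 := h.sub.subset h1
  obtain ⟨x, hx, e⟩ := List.mem_map.mp h2
  refine ⟨x.2, ?_⟩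
  rw [← e]
  exact hx

/-- No base occurs twice among the structural windows, if none does in the list. -/
theorem struct_pairwise (h : SplitAux A dA sA) (hp : A.Pairwise (fun a b => a.1 ≠ b.1)) :
    sA.Pairwise (fun a b => a.1 ≠ b.1) := by
  have h1 : (A.map Prod.fst).Pairwise (fun a b => a ≠ b) := List.pairwise_map.mpr hp
  have h2 := h1.sublist h.sub
  exact List.pairwise_map.mp h2

/-- Nothing. -/
theorem nil : SplitAux [] [] [] := by
  refine ⟨?_, List.Sublist.refl _, ?_⟩
  · intro d hd
    exact hd
  · intro _ d hd
    exact absurd hd List.not_mem_nil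

/-- Data objects only. -/
theorem datas (A : List (Nat × Nat)) : SplitAux A A [] := by
  refine ⟨?_, List.nil_sublist _, ?_⟩
  · intro d hd
    exact hd
  · intro _ d _ o ho
    exact absurd ho List.not_mem_nil

/-- One more object in front, of which the window `(p, m)` is structural. -/
theorem cons_struct (h : SplitAux A dA sA) (p n m : Nat) : SplitAux ((p, n) :: A) dA ((p, m) :: sA) := by
  refine ⟨?_, ?_, ?_⟩
  · intro d hd
    exact List.mem_cons_of_mem _ (h.data d hd)
  · rw [List.map_cons, List.map_cons]
    exact List.Sublist.cons_cons p h.sub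
  · intro hp d hd o ho
    obtain ⟨hp1, hp2⟩ := List.pairwise_cons.mp hp
    rcases List.mem_cons.mp ho with e | hin
    · rw [e]
      exact hp1 d (h.data d hd)
    · exact h.ne hp2 d hd o hin

/-- Two lists, one behind the other. -/
theorem append (h1 : SplitAux A dA sA) (h2 : SplitAux B dB sB) : SplitAux (A ++ B) (dA ++ dB) (sA ++ sB) := by
  refine ⟨?_, ?_, ?_⟩
  · intro d hd
    rcases List.mem_append.mp hd with k | k
    · exact List.mem_append_left _ (h1.data d k)
    · exact List.mem_append_right _ (h2.data d k)
  · rw [List.map_append, List.map_append]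
    exact h1.sub.append h2.sub
  · intro hp d hd o ho
    obtain ⟨pA, pB, pAB⟩ := List.pairwise_append.mp hp
    rcases List.mem_append.mp hd with kd | kd
    · rcases List.mem_append.mp ho with ko | ko
      · exact h1.ne pA d kd o ko
      · obtain ⟨n, hn⟩ := h2.struct ko
        have hne := pAB d (h1.data d kd) (o.1, n) hn
        intro e
        exact hne e.symm
    · rcases List.mem_append.mp ho with ko | ko
      · obtain ⟨n, hn⟩ := h1.struct ko
        exact pAB (o.1, n) hn d (h2.data d kd)
      · exact h2.ne pB d kd o ko

/-- The lists of the elements of a list, one behind the other. -/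
theorem flatMap {α : Type} (l : List α) (f g k : α → List (Nat × Nat)) (h : ∀ x, x ∈ l → SplitAux (f x) (g x) (k x)) :
    SplitAux (l.flatMap f) (l.flatMap g) (l.flatMap k) := by
  induction l with
  | nil =>
    rw [List.flatMap_nil, List.flatMap_nil, List.flatMap_nil]
    exact nil
  | cons x rest ih =>
    rw [List.flatMap_cons, List.flatMap_cons, List.flatMap_cons]
    apply append
    · exact h x List.mem_cons_self
    · exact ih (fun y hy => h y (List.mem_cons_of_mem _ hy))

end SplitAux

/-- The split of a colour map: the `ColorMapObject` is structural, the colour array is data. -/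
theorem Map.split_aux (m : Option Map) : SplitAux (Map.objs m) (Map.datas m) (Map.structs m) := by
  cases m with
  | none => exact SplitAux.nil
  | some x => exact (SplitAux.datas [(x.colors, 3 * x.count)]).cons_struct x.obj 24 24

/-- The split of an extension list: the counted part of the array is structural, the bytes of the blocks are data. -/
theorem Exts.split_aux (e : Option Exts) : SplitAux (Exts.objs e) (Exts.datas e) (Exts.structs e) := by
  cases e with
  | none => exact SplitAux.nil
  | some x => exact (SplitAux.datas (x.blocks.flatMap Blk.objs)).cons_struct x.arr (24 * x.cap) (24 * x.blocks.length)

/-- The split of one saved image. -/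
theorem Img.split_aux (g : Img) : SplitAux (Img.objs g) (Img.datas g) (Img.structs g) := by
  have h := ((Map.split_aux g.cm).append (SplitAux.datas (rasterObjs g.raster))).append (Exts.split_aux g.ext)
  rw [List.append_nil] at h
  exact h

/-- The split of the SavedImages array. -/
theorem Saved.split_aux (s : Option Saved) : SplitAux (Saved.objs s) (Saved.datas s) (Saved.structs s) := by
  cases s with
  | none => exact SplitAux.nil
  | some x =>
    have h := SplitAux.flatMap x.imgs Img.objs Img.datas Img.structs (fun g _ => Img.split_aux g)
    exact h.cons_struct x.arr (56 * x.cap) (56 * x.imgs.length)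

/-- **The split of the forest's objects behind gif and pv.** -/
theorem Forest.split_aux (F : Forest) :
    SplitAux (Map.objs F.scm ++ Map.objs F.icm ++ Saved.objs F.saved ++ Exts.objs F.pend) F.datas F.structs :=
  (((Map.split_aux F.scm).append (Map.split_aux F.icm)).append (Saved.split_aux F.saved)).append (Exts.split_aux F.pend)

/-- The `ColorMapObject` is the whole of its object. -/
private theorem Map.structs_prefix_aux (m : Option Map) :
    ∀ o, o ∈ Map.structs m → ∃ n, (o.1, n) ∈ Map.objs m ∧ o.2 ≤ n := by
  cases m with
  | none =>
    intro o ho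
    exact absurd ho List.not_mem_nil
  | some x =>
    intro o ho
    simp only [Map.structs, List.mem_singleton] at ho
    rw [ho]
    exact ⟨24, List.mem_cons_self, Nat.le_refl _⟩

/-- The counted blocks of an extension list are a prefix of its array (`length ≤ cap`). -/
private theorem ExtsAt.structs_prefix_aux {e : Option Exts} {p c : Nat} {mem : Mem} (h : ExtsAt e p c mem) :
    ∀ o, o ∈ Exts.structs e → ∃ n, (o.1, n) ∈ Exts.objs e ∧ o.2 ≤ n := by
  cases e with
  | none =>
    intro o ho
    exact absurd ho List.not_mem_nil
  | some x =>
    intro o ho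
    obtain ⟨_, _, k3, _⟩ := h
    simp only [Exts.structs, List.mem_singleton] at ho
    rw [ho]
    refine ⟨24 * x.cap, List.mem_cons_self, ?_⟩
    simp only
    omega

/-- The structural windows of one counted image are prefixes of its objects. -/
private theorem ImgAt.structs_prefix_aux {slot : Nat} {g : Img} {mem : Mem} (h : ImgAt slot g mem) :
    ∀ o, o ∈ Img.structs g → ∃ n, (o.1, n) ∈ Img.objs g ∧ o.2 ≤ n := by
  intro o ho
  unfold Img.structs at ho
  unfold Img.objs
  rcases List.mem_append.mp ho with h1 | h2
  · obtain ⟨n, hn, hle⟩ := Map.structs_prefix_aux g.cm o h1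
    exact ⟨n, List.mem_append_left _ (List.mem_append_left _ hn), hle⟩
  · obtain ⟨n, hn, hle⟩ := h.ext.structs_prefix_aux o h2
    exact ⟨n, List.mem_append_right _ hn, hle⟩

/-- The counted slots of the SavedImages array are a prefix of it, and so on for every counted image. -/
private theorem SavedAt.structs_prefix_aux {s : Option Saved} {p c : Nat} {mem : Mem} (h : SavedAt s p c mem) :
    ∀ o, o ∈ Saved.structs s → ∃ n, (o.1, n) ∈ Saved.objs s ∧ o.2 ≤ n := by
  cases s with
  | none =>
    intro o ho
    exact absurd ho List.not_mem_nil
  | some x =>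
    intro o ho
    obtain ⟨_, _, k3, _, k5⟩ := h
    unfold Saved.structs at ho
    unfold Saved.objs
    rcases List.mem_cons.mp ho with e | hin
    · rw [e]
      refine ⟨56 * x.cap, List.mem_cons_self, ?_⟩
      simp only
      omega
    · obtain ⟨g, hg, hog⟩ := List.mem_flatMap.mp hin
      obtain ⟨k, hk, ek⟩ := List.getElem_of_mem hg
      have himg := k5 k hk
      rw [ek] at himg
      obtain ⟨n, hn, hle⟩ := himg.structs_prefix_aux o hog
      refine ⟨n, List.mem_cons_of_mem _ ?_, hle⟩
      exact List.mem_flatMap.mpr ⟨g, hg, hn⟩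

/-- **Every structural window is a prefix of an owned object.** (`length ≤ cap` of the arrays is the shape's.) -/
theorem Shape.structs_owned {F : Forest} {R : Rd} {mem : Mem} (h : Shape F R mem) :
    ∀ o, o ∈ F.structs → ∃ n, (o.1, n) ∈ F.owned ∧ o.2 ≤ n := by
  intro o ho
  unfold Forest.structs at ho
  unfold Forest.owned
  have htail : ∃ n, (o.1, n) ∈ Map.objs F.scm ++ Map.objs F.icm ++ Saved.objs F.saved ++ Exts.objs F.pend ∧ o.2 ≤ n := by
    rcases List.mem_append.mp ho with h123 | h4
    · rcases List.mem_append.mp h123 with h12 | h3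
      · rcases List.mem_append.mp h12 with h1 | h2
        · obtain ⟨n, hn, hle⟩ := Map.structs_prefix_aux F.scm o h1
          exact ⟨n, List.mem_append_left _ (List.mem_append_left _ (List.mem_append_left _ hn)), hle⟩
        · obtain ⟨n, hn, hle⟩ := Map.structs_prefix_aux F.icm o h2
          exact ⟨n, List.mem_append_left _ (List.mem_append_left _ (List.mem_append_right _ hn)), hle⟩
      · obtain ⟨n, hn, hle⟩ := h.saved.structs_prefix_aux o h3
        exact ⟨n, List.mem_append_left _ (List.mem_append_right _ hn), hle⟩
    · obtain ⟨n, hn, hle⟩ := h.pend.structs_prefix_aux o h4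
      exact ⟨n, List.mem_append_right _ hn, hle⟩
  obtain ⟨n, hn, hle⟩ := htail
  exact ⟨n, List.mem_cons_of_mem _ (List.mem_cons_of_mem _ hn), hle⟩

/-- A data object is owned. -/
theorem Forest.datas_owned (F : Forest) : ∀ o, o ∈ F.datas → o ∈ F.owned := by
  intro o ho
  unfold Forest.owned
  exact List.mem_cons_of_mem _ (List.mem_cons_of_mem _ ((Forest.split_aux F).data o ho))

/-- **No structural object is gif or pv, and no data object is gif, pv or a structural object** (they are different entries of
the list of owned objects, which has no base twice). -/
theorem Placed.structs_ne {H : Heap} {F : Forest} (hp : Placed H F.owned) :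
    (∀ o, o ∈ F.structs → o.1 ≠ F.gif ∧ o.1 ≠ F.pv) ∧
    (∀ d, d ∈ F.datas → d.1 ≠ F.gif ∧ d.1 ≠ F.pv ∧ ∀ o, o ∈ F.structs → o.1 ≠ d.1) := by
  have hs := Forest.split_aux F
  have hpa := hp.apart
  unfold Forest.owned at hpa
  obtain ⟨hg, hpa1⟩ := List.pairwise_cons.mp hpa
  obtain ⟨hv, hpa2⟩ := List.pairwise_cons.mp hpa1
  refine ⟨?_, ?_⟩
  · intro o ho
    obtain ⟨n, hn⟩ := hs.struct ho
    have h1 := hg (o.1, n) (List.mem_cons_of_mem _ hn)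
    have h2 := hv (o.1, n) hn
    exact ⟨fun e => h1 e.symm, fun e => h2 e.symm⟩
  · intro d hd
    have hin := hs.data d hd
    have h1 := hg d (List.mem_cons_of_mem _ hin)
    have h2 := hv d hin
    refine ⟨fun e => h1 e.symm, fun e => h2 e.symm, ?_⟩
    intro o ho
    exact hs.ne hpa2 d hd o ho

/-- **Two structural windows with the same base are the same window** (no base occurs twice among them). -/
theorem Placed.structs_inj {H : Heap} {F : Forest} (hp : Placed H F.owned) {o o' : Nat × Nat} (ho : o ∈ F.structs)
    (ho' : o' ∈ F.structs) (e : o.1 = o'.1) : o = o' := by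
  have hpa := hp.apart
  unfold Forest.owned at hpa
  obtain ⟨_, hpa1⟩ := List.pairwise_cons.mp hpa
  obtain ⟨_, hpa2⟩ := List.pairwise_cons.mp hpa1
  have hpw := (Forest.split_aux F).struct_pairwise hpa2
  have key : ∀ (l : List (Nat × Nat)), l.Pairwise (fun x y => x.1 ≠ y.1) → o ∈ l → o' ∈ l → o = o' := by
    intro l hl
    induction l with
    | nil =>
      intro hin
      exact absurd hin List.not_mem_nil
    | cons x rest ih =>
      intro hin hin'
      obtain ⟨hx, hrest⟩ := List.pairwise_cons.mp hl
      rcases List.mem_cons.mp hin with e1 | hr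
      · rcases List.mem_cons.mp hin' with e2 | hr'
        · exact e1.trans e2.symm
        · subst e1
          exact absurd e (hx o' hr')
      · rcases List.mem_cons.mp hin' with e2 | hr'
        · subst e2
          exact absurd e.symm (hx o hr)
        · exact ih hrest hr hr'
  exact key F.structs hpw ho ho'

theorem GifOK.gif_live {H : Heap} {F : Forest} {R : Rd} {mem : Mem} (h : GifOK H F R mem) : H.Live F.gif 120 :=
  h.owns.live (F.gif, 120) List.mem_cons_self

theorem GifOK.pv_live {H : Heap} {F : Forest} {R : Rd} {mem : Mem} (h : GifOK H F R mem) : H.Live F.pv 24936 :=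
  h.owns.live (F.pv, 24936) (List.mem_cons_of_mem _ List.mem_cons_self)

theorem GifOK.gif_ne_pv {H : Heap} {F : Forest} {R : Rd} {mem : Mem} (h : GifOK H F R mem) : F.gif ≠ F.pv := by
  have hp := List.pairwise_cons.mp h.owns.apart
  exact hp.1 (F.pv, 24936) List.mem_cons_self

/-- The state invariant for another heap in which the forest's objects are live. -/
theorem GifOK.reheap {H H' : Heap} {F : Forest} {R : Rd} {mem : Mem} (h : GifOK H F R mem) (ho : Owns H' F.owned) :
    GifOK H' F R mem :=
  ⟨ho, h.shape⟩

/-! The frame lemma: what a loose window is, brought to ONE form; then its disjointness from everything `Shape` reads. -/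

/-- Where gif is. -/
private theorem Placed.gif_at_aux {H : Heap} {F : Forest} (hp : Placed H F.owned) :
    ∃ x, x ∈ H.objs ∧ x.base = F.gif ∧ 120 ≤ x.cap :=
  hp.at_ (F.gif, 120) List.mem_cons_self

/-- Where pv is. -/
private theorem Placed.pv_at_aux {H : Heap} {F : Forest} (hp : Placed H F.owned) :
    ∃ x, x ∈ H.objs ∧ x.base = F.pv ∧ 24936 ≤ x.cap :=
  hp.at_ (F.pv, 24936) (List.mem_cons_of_mem _ List.mem_cons_self)

/-- gif and pv are two objects. -/
private theorem Placed.gif_ne_pv_aux {H : Heap} {F : Forest} (hp : Placed H F.owned) : F.gif ≠ F.pv := by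
  have hpa := hp.apart
  unfold Forest.owned at hpa
  exact (List.pairwise_cons.mp hpa).1 (F.pv, 24936) List.mem_cons_self

/-- **A LOOSE WINDOW INSIDE AN OBJECT, in the one form the frame lemma uses**: the window lies inside the capacity of an object `x`
of the heap; if `x` is gif, it misses the three windows of pointer fields; if `x` is pv, it misses `FileState` and `File`, `Read`;
if `x` is a structural object, it lies behind the structural prefix. -/
def InObjAux (H : Heap) (F : Forest) (w : Span) : Prop :=
  ∃ x, x ∈ H.objs ∧ x.base ≤ w.lo ∧ w.hi ≤ x.base + x.cap ∧
    (x.base = F.gif →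
      (F.gif + 40 ≤ w.lo ∨ w.hi ≤ F.gif + 24) ∧ (F.gif + 96 ≤ w.lo ∨ w.hi ≤ F.gif + 64) ∧ (F.gif + 120 ≤ w.lo ∨ w.hi ≤ F.gif + 104)) ∧
    (x.base = F.pv → (F.pv + 4 ≤ w.lo ∨ w.hi ≤ F.pv) ∧ (F.pv + 80 ≤ w.lo ∨ w.hi ≤ F.pv + 64)) ∧
    (∀ o, o ∈ F.structs → x.base = o.1 → o.1 + o.2 ≤ w.lo)

/-- A window inside gif that misses its pointer fields. -/
private theorem InObjAux.of_gif_aux {H : Heap} {F : Forest} {w : Span} (hp : Placed H F.owned) (h1 : F.gif ≤ w.lo)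
    (h2 : w.hi ≤ F.gif + 120)
    (h3 : (F.gif + 40 ≤ w.lo ∨ w.hi ≤ F.gif + 24) ∧ (F.gif + 96 ≤ w.lo ∨ w.hi ≤ F.gif + 64) ∧
      (F.gif + 120 ≤ w.lo ∨ w.hi ≤ F.gif + 104)) : InObjAux H F w := by
  obtain ⟨x, hx, eb, hc⟩ := hp.gif_at_aux
  refine ⟨x, hx, by omega, by omega, ?_, ?_, ?_⟩
  · intro _
    exact h3
  · intro e
    exact absurd (eb.symm.trans e) hp.gif_ne_pv_aux
  · intro o ho e
    exact absurd (e.symm.trans eb) (hp.structs_ne.1 o ho).1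

/-- A window inside pv that misses `FileState`, `File`, `Read`. -/
private theorem InObjAux.of_pv_aux {H : Heap} {F : Forest} {w : Span} (hp : Placed H F.owned) (h1 : F.pv ≤ w.lo)
    (h2 : w.hi ≤ F.pv + 24936) (h3 : (F.pv + 4 ≤ w.lo ∨ w.hi ≤ F.pv) ∧ (F.pv + 80 ≤ w.lo ∨ w.hi ≤ F.pv + 64)) :
    InObjAux H F w := by
  obtain ⟨x, hx, eb, hc⟩ := hp.pv_at_aux
  refine ⟨x, hx, by omega, by omega, ?_, ?_, ?_⟩
  · intro e
    exact absurd (e.symm.trans eb) hp.gif_ne_pv_aux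
  · intro _
    exact h3
  · intro o ho e
    exact absurd (e.symm.trans eb) (hp.structs_ne.1 o ho).2

/-- **A loose window is a gap, or a window inside an object in the one form.** -/
private theorem Loose.norm_aux {H : Heap} {F : Forest} {R : Rd} {w : Span} (hl : Loose H F R w) (hp : Placed H F.owned) :
    Gap H R w ∨ InObjAux H F w := by
  rcases hl with hg | ⟨a, b⟩ | ⟨a, b⟩ | ⟨a, b⟩ | ⟨a, b⟩ | ⟨a, b⟩ | ⟨x, hx, a, b, n1, n2, n3⟩ | ⟨o, x, ho, hx, e, a, b⟩
  · exact Or.inl hg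
  · exact Or.inr (InObjAux.of_gif_aux hp (by omega) (by omega) ⟨by omega, by omega, by omega⟩)
  · exact Or.inr (InObjAux.of_gif_aux hp (by omega) (by omega) ⟨by omega, by omega, by omega⟩)
  · exact Or.inr (InObjAux.of_gif_aux hp (by omega) (by omega) ⟨by omega, by omega, by omega⟩)
  · exact Or.inr (InObjAux.of_pv_aux hp (by omega) (by omega) ⟨by omega, by omega⟩)
  · exact Or.inr (InObjAux.of_pv_aux hp (by omega) (by omega) ⟨by omega, by omega⟩)
  · refine Or.inr ⟨x, hx, a, b, ?_, ?_, ?_⟩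
    · intro e
      exact absurd e n1
    · intro e
      exact absurd e n2
    · intro o ho e
      exact absurd e.symm (n3 o ho)
  · refine Or.inr ⟨x, hx, by omega, b, ?_, ?_, ?_⟩
    · intro e'
      exact absurd (e.symm.trans e') (hp.structs_ne.1 o ho).1
    · intro e'
      exact absurd (e.symm.trans e') (hp.structs_ne.1 o ho).2
    · intro o' ho' e'
      have eo : o = o' := hp.structs_inj ho ho' (e.symm.trans e')
      rw [← eo]
      exact a

/-- The three windows of pointer fields of gif meet no loose window. -/
private theorem InObjAux.gif_disj_aux {H : Heap} {F : Forest} {R : Rd} {mem : Mem} {w : Span} (hok : HeapOK H mem)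
    (hn : Gap H R w ∨ InObjAux H F w) {xg : HObj} (hxg : xg ∈ H.objs) (eb : xg.base = F.gif) (hc : 120 ≤ xg.cap) :
    (F.gif + 40 ≤ w.lo ∨ w.hi ≤ F.gif + 24) ∧ (F.gif + 96 ≤ w.lo ∨ w.hi ≤ F.gif + 64) ∧ (F.gif + 120 ≤ w.lo ∨ w.hi ≤ F.gif + 104) := by
  rcases hn with hg | ⟨x, hx, a, b, s1, _, _⟩
  · have := hg.1 xg hxg
    refine ⟨?_, ?_, ?_⟩
    · omega
    · omega
    · omega
  · by_cases e : x.base = F.gif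
    · exact s1 e
    · have hne : x.base ≠ xg.base := by
        rw [eb]
        exact e
      have hap := hok.apart_of_base_ne hx hxg hne
      refine ⟨?_, ?_, ?_⟩
      · omega
      · omega
      · omega

/-- `FileState`, and `File`, `Read`, of pv meet no loose window. -/
private theorem InObjAux.pv_disj_aux {H : Heap} {F : Forest} {R : Rd} {mem : Mem} {w : Span} (hok : HeapOK H mem)
    (hn : Gap H R w ∨ InObjAux H F w) {xp : HObj} (hxp : xp ∈ H.objs) (eb : xp.base = F.pv) (hc : 24936 ≤ xp.cap) :
    (F.pv + 4 ≤ w.lo ∨ w.hi ≤ F.pv) ∧ (F.pv + 80 ≤ w.lo ∨ w.hi ≤ F.pv + 64) := by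
  rcases hn with hg | ⟨x, hx, a, b, _, s2, _⟩
  · have := hg.1 xp hxp
    refine ⟨?_, ?_⟩
    · omega
    · omega
  · by_cases e : x.base = F.pv
    · exact s2 e
    · have hne : x.base ≠ xp.base := by
        rw [eb]
        exact e
      have hap := hok.apart_of_base_ne hx hxp hne
      refine ⟨?_, ?_⟩
      · omega
      · omega

/-- A structural window (a prefix of the object `y`) meets no loose window. -/
private theorem InObjAux.struct_disj_aux {H : Heap} {F : Forest} {R : Rd} {mem : Mem} {w : Span} (hok : HeapOK H mem)
    (hn : Gap H R w ∨ InObjAux H F w) {o : Nat × Nat} (ho : o ∈ F.structs) {y : HObj} (hy : y ∈ H.objs) (eb : y.base = o.1)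
    (hc : o.2 ≤ y.cap) : o.1 + o.2 ≤ w.lo ∨ w.hi ≤ o.1 := by
  rcases hn with hg | ⟨x, hx, a, b, _, _, s3⟩
  · have := hg.1 y hy
    omega
  · by_cases e : x.base = o.1
    · exact Or.inl (s3 o ho e)
    · have hne : x.base ≠ y.base := by
        rw [eb]
        exact e
      have hap := hok.apart_of_base_ne hx hy hne
      omega

/-- The cursor (a stack object) meets no loose window. -/
private theorem InObjAux.cursor_disj_aux {H : Heap} {F : Forest} {R : Rd} {mem : Mem} {w : Span} (hok : HeapOK H mem)
    (hcur : 0x700000 ≤ R.cur ∧ R.cur + 16 ≤ 0x800000) (hn : Gap H R w ∨ InObjAux H F w) :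
    R.cur + 16 ≤ w.lo ∨ w.hi ≤ R.cur := by
  rcases hn with hg | ⟨x, hx, a, b, _, _, _⟩
  · have := hg.2.1
    omega
  · have hr := hok.obj_range hx
    have hi := hok.obj_inside hx
    have hoff := hok.offStack
    omega

/-- The constants (below every heap) meet no loose window. -/
private theorem InObjAux.consts_disj_aux {H : Heap} {F : Forest} {R : Rd} {mem : Mem} {w : Span} (hok : HeapOK H mem)
    (hn : Gap H R w ∨ InObjAux H F w) : 0x14139a ≤ w.lo ∨ w.hi ≤ 0x141300 := by
  rcases hn with hg | ⟨x, hx, a, b, _, _, _⟩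
  · have := hg.2.2
    omega
  · have hi := hok.obj_inside hx
    omega

/-- **THE FRAME LEMMA, in the form a walk delivers the memory**: a footprint of loose windows keeps the shape. `hp`: where the
forest's objects are (from `Owns.placed`; kept by every heap transition). `hcur`: the cursor lies in the stack region
(`Ctx.cursor_range`). -/
theorem Shape.sameExcept {H : Heap} {F : Forest} {R : Rd} {mem mem' : Mem} {ws : List Span} (h : Shape F R mem)
    (hp : Placed H F.owned) (hok : HeapOK H mem) (hcur : 0x700000 ≤ R.cur ∧ R.cur + 16 ≤ 0x800000)
    (hs : Mem.SameExcept ws mem mem') (hl : ∀ w, w ∈ ws → Loose H F R w) : Shape F R mem' := by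
  have hn : ∀ w, w ∈ ws → Gap H R w ∨ InObjAux H F w := fun w hw => (hl w hw).norm_aux hp
  obtain ⟨xg, hxg, ebg, hcg⟩ := hp.gif_at_aux
  obtain ⟨xp, hxp, ebp, hcp⟩ := hp.pv_at_aux
  have hig := hok.obj_inside hxg
  have hip := hok.obj_inside hxp
  have hst : ∀ o, o ∈ F.structs → ∃ y, y ∈ H.objs ∧ y.base = o.1 ∧ o.2 ≤ y.cap := by
    intro o ho
    obtain ⟨n, hn, hle⟩ := h.structs_owned o ho
    obtain ⟨y, hy, e, hc⟩ := hp.at_ (o.1, n) hn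
    simp only at e hc
    exact ⟨y, hy, e, by omega⟩
  have hk : F.Kept R mem mem' := by
    refine ⟨?_, ?_, ?_, ?_, ?_, ?_, ?_, ?_⟩
    · apply hs.eqOn
      intro w hw
      exact (InObjAux.gif_disj_aux hok (hn w hw) hxg ebg hcg).1
    · apply hs.eqOn
      intro w hw
      exact (InObjAux.gif_disj_aux hok (hn w hw) hxg ebg hcg).2.1
    · apply hs.eqOn
      intro w hw
      exact (InObjAux.gif_disj_aux hok (hn w hw) hxg ebg hcg).2.2
    · apply hs.eqOn
      intro w hw
      exact (InObjAux.pv_disj_aux hok (hn w hw) hxp ebp hcp).1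
    · apply hs.eqOn
      intro w hw
      exact (InObjAux.pv_disj_aux hok (hn w hw) hxp ebp hcp).2
    · apply hs.eqOn
      intro w hw
      exact InObjAux.cursor_disj_aux hok hcur (hn w hw)
    · apply hs.eqOn
      intro w hw
      exact InObjAux.consts_disj_aux hok (hn w hw)
    · intro o ho
      obtain ⟨y, hy, e, hc⟩ := hst o ho
      apply hs.eqOn
      intro w hw
      exact InObjAux.struct_disj_aux hok (hn w hw) ho hy e hc
  apply h.frame hk
  · intro o ho
    obtain ⟨y, hy, e, hc⟩ := hst o ho
    have hiy := hok.obj_inside hy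
    omega
  · omega
  · omega
  · omega

/-- The same for the whole state invariant. -/
theorem GifOK.sameExcept {H : Heap} {F : Forest} {R : Rd} {mem mem' : Mem} {ws : List Span} (h : GifOK H F R mem)
    (hok : HeapOK H mem) (hcur : 0x700000 ≤ R.cur ∧ R.cur + 16 ≤ 0x800000) (hs : Mem.SameExcept ws mem mem')
    (hl : ∀ w, w ∈ ws → Loose H F R w) : GifOK H F R mem' :=
  ⟨h.owns, h.shape.sameExcept (h.owns.placed hok) hok hcur hs hl⟩

/-! How a window is shown loose. -/

/-- A window off the heap's region (the stack, the shadow, the output, a global) that misses the cursor and the constants. -/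
theorem Loose.offHeap {H : Heap} {F : Forest} {R : Rd} {mem : Mem} {w : Span} (hok : HeapOK H mem)
    (h1 : w.hi ≤ H.base ∨ H.limit ≤ w.lo) (h2 : w.hi ≤ R.cur ∨ R.cur + 16 ≤ w.lo) (h3 : w.hi ≤ 0x141300 ∨ 0x14139a ≤ w.lo) :
    Loose H F R w := by
  refine Or.inl ⟨?_, h2, h3⟩
  intro x hx
  have hr := hok.obj_range hx
  have hroom := hok.room
  omega

/-- A window of the stack BELOW the cursor (the function's own frame and whatever it pushes: `Ctx.cursor_range`). -/
theorem Loose.stack {H : Heap} {F : Forest} {R : Rd} {mem : Mem} {w : Span} (hok : HeapOK H mem) (h1 : 0x700000 ≤ w.lo)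
    (h2 : w.hi ≤ 0x800000) (h3 : w.hi ≤ R.cur) : Loose H F R w := by
  refine Or.inl ⟨?_, Or.inl h3, Or.inr (by omega)⟩
  intro x hx
  have hr := hok.obj_range hx
  have hi := hok.obj_inside hx
  have hoff := hok.offStack
  omega

/-- A window of the shadow region. -/
theorem Loose.shadow {H : Heap} {F : Forest} {R : Rd} {mem : Mem} {w : Span} (hok : HeapOK H mem)
    (hcur : R.cur + 16 ≤ 0x800000) (h1 : 0xC00000 ≤ w.lo) : Loose H F R w := by
  refine Or.inl ⟨?_, Or.inr (by omega), Or.inr (by omega)⟩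
  intro x hx
  have hi := hok.obj_inside hx
  omega

/-- The heap's bookkeeping: the control cell; the header of a chunk (`[p − 32, p)` of an object at `p`); anything at or above the
bump pointer (the chunk of the next allocation). `hcur`, as always, from `Ctx.cursor_range`. -/
theorem Loose.cell {H : Heap} {F : Forest} {R : Rd} {mem : Mem} {w : Span} (hok : HeapOK H mem)
    (hcur : 0x700000 ≤ R.cur ∧ R.cur + 16 ≤ 0x800000) (h1 : H.base ≤ w.lo) (h2 : w.hi ≤ H.base + 32) : Loose H F R w := by
  have hlo := hok.lo
  have hroom := hok.room
  have hoff := hok.offStack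
  refine Or.inl ⟨?_, by omega, by omega⟩
  intro x hx
  have hr := hok.obj_range hx
  omega

theorem Loose.header {H : Heap} {F : Forest} {R : Rd} {mem : Mem} {w : Span} (hok : HeapOK H mem)
    (hcur : 0x700000 ≤ R.cur ∧ R.cur + 16 ≤ 0x800000) {x : HObj} (hx : x ∈ H.objs) (h1 : x.base - 32 ≤ w.lo) (h2 : w.hi ≤ x.base) :
    Loose H F R w := by
  have hlo := hok.lo
  have hroom := hok.room
  have hoff := hok.offStack
  have hrx := hok.obj_range hx
  refine Or.inl ⟨?_, by omega, by omega⟩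
  intro y hy
  by_cases e : y = x
  · rw [e]
    exact Or.inl h2
  · have hap := hok.apart hy hx e
    omega

theorem Loose.above {H : Heap} {F : Forest} {R : Rd} {mem : Mem} {w : Span} (hok : HeapOK H mem)
    (hcur : 0x700000 ≤ R.cur ∧ R.cur + 16 ≤ 0x800000) (h1 : H.base + 32 + H.used ≤ w.lo) (h2 : w.hi ≤ H.limit) : Loose H F R w := by
  have hlo := hok.lo
  have hoff := hok.offStack
  refine Or.inl ⟨?_, by omega, by omega⟩
  intro x hx
  have hr := hok.obj_range hx
  omega

/-- A window inside a data object of the forest. -/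
theorem Loose.data {H : Heap} {F : Forest} {R : Rd} {mem : Mem} {w : Span} (hok : HeapOK H mem) (ho : Owns H F.owned)
    {d : Nat × Nat} (hd : d ∈ F.datas) (h1 : d.1 ≤ w.lo) (h2 : w.hi ≤ d.1 + d.2) : Loose H F R w := by
  obtain ⟨c, hlc⟩ := ho.live d (F.datas_owned d hd)
  have hsc := hok.size_le_cap hlc
  obtain ⟨n1, n2, n3⟩ := (ho.placed hok).structs_ne.2 d hd
  simp only at hsc
  refine Or.inr (Or.inr (Or.inr (Or.inr (Or.inr (Or.inr (Or.inl ⟨_, hlc, h1, ?_, n1, n2, n3⟩))))))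
  simp only
  omega

/-- A window inside a live object that the forest does not own (one just allocated). -/
theorem Loose.fresh {H : Heap} {F : Forest} {R : Rd} {mem : Mem} {w : Span} (hok : HeapOK H mem) {p n : Nat} (hl : H.Live p n)
    (hne : ∀ o, o ∈ F.owned → o.1 ≠ p) (hs : Shape F R mem) (h1 : p ≤ w.lo) (h2 : w.hi ≤ p + n) : Loose H F R w := by
  obtain ⟨c, hlc⟩ := hl
  have hsc := hok.size_le_cap hlc
  simp only at hsc
  have n1 : p ≠ F.gif := by
    intro e
    exact hne (F.gif, 120) List.mem_cons_self e.symm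
  have n2 : p ≠ F.pv := by
    intro e
    exact hne (F.pv, 24936) (List.mem_cons_of_mem _ List.mem_cons_self) e.symm
  have n3 : ∀ o, o ∈ F.structs → o.1 ≠ p := by
    intro o ho
    obtain ⟨m, hm, _⟩ := hs.structs_owned o ho
    exact hne (o.1, m) hm
  refine Or.inr (Or.inr (Or.inr (Or.inr (Or.inr (Or.inr (Or.inl ⟨_, hlc, h1, ?_, n1, n2, n3⟩))))))
  simp only
  omega

/-- A loose window of the kinds a function's own stores have is a heap window: off the heap's region … -/
theorem HeapWin.offHeap {H : Heap} {mem : Mem} {w : Span} (hok : HeapOK H mem) (h : w.hi ≤ H.base ∨ H.limit ≤ w.lo) : HeapWin H w := by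
  have := hok.room
  unfold HeapWin
  omega

/-- … or inside a live object. -/
theorem HeapWin.live {H : Heap} {mem : Mem} {w : Span} (hok : HeapOK H mem) {p n : Nat} (hl : H.Live p n) (h1 : p ≤ w.lo)
    (h2 : w.hi ≤ p + n) : HeapWin H w := by
  obtain ⟨c, hl⟩ := hl
  have hs := hok.size_le_cap hl
  simp only at hs
  exact Or.inr ⟨_, hl, h1, by simp only; omega⟩

/-- Where the cursor is (`Ctx.cursor_range` below, needed here already). -/
private theorem Ctx.cursor_where_aux {rest : List Obj} {frames : List (Nat × FrameLayout)} {R : Rd} {others : List Obj} {top : Nat}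
    {mem : Mem} (h : Ctx rest frames R) (hinv : ShadowInv others frames top mem) :
    0x700000 ≤ R.cur ∧ R.cur + 16 ≤ 0x800000 ∧ top ≤ R.cur := by
  obtain ⟨bF, hbF, g1, g2⟩ := ShadowInv.stackObj_gran hinv.stack h.cursor
  obtain ⟨hF, a8, atop, ahi, _⟩ := hinv.stack.active bF hbF
  have hlo := hinv.stack.lo
  have hs8 := hF.1
  unfold Obj.gLo at g1
  unfold Obj.gHi at g2
  simp only at g1 g2
  omega

/-- **THE COMMON PRECONDITION AT A LATER STATE of the same function** (a callee's entry, a loop head): no shadow byte was written,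
every window written is loose and a heap window, the stack pointer is not above the entry's. -/
theorem Env.sameExcept {H : Heap} {rest : List Obj} {frames : List (Nat × FrameLayout)} {F : Forest} {R : Rd} {u s : State}
    {ws : List Span} (h : Env H rest frames F R u) (hun : ShadowUntouched u.mem s.mem) (hs : Mem.SameExcept ws u.mem s.mem)
    (hl : ∀ w, w ∈ ws → Loose H F R w) (hw : ∀ w, w ∈ ws → HeapWin H w) (hle : (s.reg .rsp).toNat ≤ (u.reg .rsp).toNat)
    (h8 : (s.reg .rsp).toNat % 8 = 0) (hlo : 0x700000 ≤ (s.reg .rsp).toNat + 8) : Env H rest frames F R s := by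
  have hcr := h.ctx.cursor_where_aux h.heap.inv.shadow
  have hinv := (h.heap.inv.sameExcept hun hs hw).lower (top' := (s.reg .rsp).toNat + 8) (by omega) (by omega) hlo
  refine ⟨⟨hinv, h.heap.base, h.heap.limit, h.heap.text, h.heap.offText⟩, h.ctx, ?_⟩
  exact h.ok.sameExcept h.heap.inv.heap ⟨hcr.1, hcr.2.1⟩ hs hl

/-- The reader's measure through a footprint that misses the cursor. -/
theorem rem_sameExcept {R : Rd} {mem mem' : Mem} {ws : List Span} (hs : Mem.SameExcept ws mem mem') (hc : R.cur + 16 < 2 ^ 64)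
    (hd : ∀ w, w ∈ ws → w.hi ≤ R.cur ∨ R.cur + 16 ≤ w.lo) : rem R mem' = rem R mem := by
  apply rem_frame _ hc
  apply hs.eqOn
  intro w hw
  have := hd w hw
  omega

/-! ### 5c. Where things are -/

/-- **The cursor lies in the stack region, at or above the clean stack's end `top`** (it is an object of an active frame; the
function's own frame and everything it pushes lie below `top`). -/
theorem Ctx.cursor_range {rest : List Obj} {frames : List (Nat × FrameLayout)} {R : Rd} {others : List Obj} {top : Nat} {mem : Mem}
    (h : Ctx rest frames R) (hinv : ShadowInv others frames top mem) :
    0x700000 ≤ R.cur ∧ R.cur + 16 ≤ 0x800000 ∧ top ≤ R.cur := by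
  exact h.cursor_where_aux hinv

/-- **The input lies outside the stack region, outside the heap's region, in the data space**, if it is not empty. -/
theorem Ctx.input_range {rest : List Obj} {frames : List (Nat × FrameLayout)} {R : Rd} {H : Heap} {top : Nat} {mem : Mem}
    (h : Ctx rest frames R) (hinv : HeapInv H rest frames top mem) (hn : 0 < R.inN) :
    0x100000 ≤ R.inB ∧ R.inB + R.inN ≤ 0xC00000 ∧ (R.inB + R.inN ≤ 0x700000 ∨ 0x800000 ≤ R.inB) ∧
      (R.inB + R.inN ≤ H.base ∨ H.limit ≤ R.inB) := by
  rcases h.input with h0 | hl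
  · omega
  · obtain ⟨o, ho, k1, k2⟩ := hl
    have hor : o ∈ rest := by
      rcases List.mem_append.mp ho with hst | hr
      · unfold stackObjs at hst
        rw [List.flatMap_nil] at hst
        exact absurd hst List.not_mem_nil
      · exact hr
    have hin := hinv.shadow.shadow.inside (o := o) (List.mem_append_right _ (List.mem_append_right _ hor)) (by omega)
    have hoff := hinv.shadow.off o (List.mem_append_right _ hor)
    have hout := hinv.restOut o hor
    unfold OffStack at hoff
    omega

/-- **The input is live** under any heap and any list of frames. -/
theorem Ctx.input_live {rest : List Obj} {frames : List (Nat × FrameLayout)} {R : Rd} (h : Ctx rest frames R) (H : Heap)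
    (frames' : List (Nat × FrameLayout)) {a n : Nat} (hn : 0 < R.inN) (h1 : R.inB ≤ a) (h2 : a + n ≤ R.inB + R.inN) :
    LiveIn (H.liveObjs ++ rest) frames' a n := by
  rcases h.input with h0 | hl
  · omega
  · obtain ⟨o, ho, k1, k2⟩ := hl
    have hor : o ∈ rest := by
      rcases List.mem_append.mp ho with hst | hr
      · unfold stackObjs at hst
        rw [List.flatMap_nil] at hst
        exact absurd hst List.not_mem_nil
      · exact hr
    refine ⟨o, List.mem_append_right _ (List.mem_append_right _ hor), ?_, ?_⟩
    · omega
    · omega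

/-- **The cursor is live.** -/
theorem Ctx.cursor_live {rest : List Obj} {frames : List (Nat × FrameLayout)} {R : Rd} (h : Ctx rest frames R) (others : List Obj)
    {a n : Nat} (h1 : R.cur ≤ a) (h2 : a + n ≤ R.cur + 16) : LiveIn others frames a n :=
  ⟨⟨R.cur, 16, .stack⟩, List.mem_append_left _ h.cursor, h1, h2⟩

/-- **A range inside an owned object is live**, under any list of frames. -/
theorem Owns.liveIn {H : Heap} {objs : List (Nat × Nat)} (h : Owns H objs) {o : Nat × Nat} (ho : o ∈ objs) (rest : List Obj)
    (frames : List (Nat × FrameLayout)) {a n : Nat} (h1 : o.1 ≤ a) (h2 : a + n ≤ o.1 + o.2) :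
    LiveIn (H.liveObjs ++ rest) frames a n :=
  (h.live o ho).liveIn rest frames h1 h2

/-! ### 6. The four tables of the private object: every access inside ITS OWN array -/

/-- **`Buf[i]`, `i < 256`** (and a read of `k` bytes at `&Buf[i]` with `i + k ≤ 256`). -/
theorem bufLive {H : Heap} {pv : Nat} (h : H.Live pv 24936) (rest : List Obj) (frames : List (Nat × FrameLayout)) (i k : Nat)
    (hi : i + k ≤ 256) : LiveIn (H.liveObjs ++ rest) frames (GifFilePrivateType.Buf_at pv i) k := by
  simp only [gfield]
  exact h.liveIn rest frames (by omega) (by omega)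

/-- **`Stack[i]`, `i < 4095`.** -/
theorem stackLive {H : Heap} {pv : Nat} (h : H.Live pv 24936) (rest : List Obj) (frames : List (Nat × FrameLayout)) (i : Nat)
    (hi : i < 4095) : LiveIn (H.liveObjs ++ rest) frames (GifFilePrivateType.Stack_at pv i) 1 := by
  simp only [gfield]
  exact h.liveIn rest frames (by omega) (by omega)

/-- **`Suffix[i]`, `i < 4096`.** -/
theorem suffixLive {H : Heap} {pv : Nat} (h : H.Live pv 24936) (rest : List Obj) (frames : List (Nat × FrameLayout)) (i : Nat)
    (hi : i < 4096) : LiveIn (H.liveObjs ++ rest) frames (GifFilePrivateType.Suffix_at pv i) 1 := by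
  simp only [gfield]
  exact h.liveIn rest frames (by omega) (by omega)

/-- **`Prefix[i]`, `i < 4096`** (4 bytes). -/
theorem prefixLive {H : Heap} {pv : Nat} (h : H.Live pv 24936) (rest : List Obj) (frames : List (Nat × FrameLayout)) (i : Nat)
    (hi : i < 4096) : LiveIn (H.liveObjs ++ rest) frames (GifFilePrivateType.Prefix_at pv i) 4 := by
  simp only [gfield]
  exact h.liveIn rest frames (by omega) (by omega)

/-- The windows of the four tables, for the footprints of the LZW functions: `Buf`, `Stack`, `Suffix`, `Prefix`. (A footprint
must be a LITERAL list for the frame tactics: a contract writes `⟨pv + 344, pv + 4439⟩`, and these names document the numbers.) -/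
def bufWin (pv : Nat) : Span := ⟨pv + 88, pv + 344⟩
def stackWin (pv : Nat) : Span := ⟨pv + 344, pv + 4439⟩
def suffixWin (pv : Nat) : Span := ⟨pv + 4439, pv + 8535⟩
def prefixWin (pv : Nat) : Span := ⟨pv + 8536, pv + 24920⟩

/-! ### 7. A protected frame over the heap's invariant -/

/-- **After the prologue of a protected function** entered with the return-address slot at `top` (the shadow layer's
`ShadowInv.prologue_ra`, lifted to the heap's invariant: the prologue's stores go to the shadow of the stack). -/
theorem _root_.Asan.HeapInv.prologue_ra {H : Heap} {rest : List Obj} {frames : List (Nat × FrameLayout)} {top top' : Nat} {mem : Mem}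
    (h : HeapInv H rest frames (top + 8) mem) {F : FrameLayout} (hF : F.OK) (hra : top % 8 = 0)
    (ht : top' ≤ top - F.raOff) (h8 : top' % 8 = 0) (hlo : 0x700000 ≤ top') :
    HeapInv H rest ((top - F.raOff, F) :: frames) top' (storesMem mem ((top - F.raOff) / 8) F.prologue) := by
  have hF' := hF
  obtain ⟨hs8, hpin, _, _, _, _, _, _, hr8, hrs⟩ := hF'
  have hhi := h.shadow.stack.hi
  have hlim := h.heap.hi
  have hoff := h.heap.offStack
  have hg : (top - F.raOff) / 8 + F.size / 8 ≤ 0x200000 := by omega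
  have hse := storesMem_sameExcept mem ((top - F.raOff) / 8) (F.size / 8) F.prologue hpin hg
  refine ⟨?_, h.shadow.prologue_ra hF hra ht h8 hlo, h.restOut, ?_⟩
  · apply h.heap.eqOn
    apply hse.eqOn
    intro w hw
    have e := List.mem_singleton.mp hw
    rw [e]
    simp only
    omega
  · intro g hg1 hg2 hfree
    rw [shadowOf_storesMem_other mem ((top - F.raOff) / 8) (F.size / 8) F.prologue hpin hg g (by omega) (by omega)]
    exact h.poisoned g hg1 hg2 hfree

/-- **After the epilogue** (`ShadowInv.epilogue_ra`, lifted). -/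
theorem _root_.Asan.HeapInv.epilogue_ra {H : Heap} {rest : List Obj} {frames : List (Nat × FrameLayout)} {top top' : Nat} {mem : Mem}
    {F : FrameLayout} (h : HeapInv H rest ((top - F.raOff, F) :: frames) top' mem) (hra : top % 8 = 0)
    (hhi : top + 8 ≤ 0x800000) (hfr : ∀ bF, bF ∈ frames → top + 8 ≤ bF.1) :
    HeapInv H rest frames (top + 8) (storesMem mem ((top - F.raOff) / 8) F.epilogue) := by
  have hact := h.shadow.stack.active (top - F.raOff, F) List.mem_cons_self
  simp only at hact
  obtain ⟨hF, hb8, hb1, hb2, _⟩ := hact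
  obtain ⟨hs8, _, hein, _, _, _, _, _, hr8, hrs⟩ := hF
  have hlo := h.shadow.stack.lo
  have hlim := h.heap.hi
  have hoff := h.heap.offStack
  have hg : (top - F.raOff) / 8 + F.size / 8 ≤ 0x200000 := by omega
  have hse := storesMem_sameExcept mem ((top - F.raOff) / 8) (F.size / 8) F.epilogue hein hg
  refine ⟨?_, h.shadow.epilogue_ra hra hhi hfr, h.restOut, ?_⟩
  · apply h.heap.eqOn
    apply hse.eqOn
    intro w hw
    have e := List.mem_singleton.mp hw
    rw [e]
    simp only
    omega
  · intro g hg1 hg2 hfree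
    rw [shadowOf_storesMem_other mem ((top - F.raOff) / 8) (F.size / 8) F.epilogue hein hg g (by omega) (by omega)]
    exact h.poisoned g hg1 hg2 hfree

/-- The stores of a prologue or an epilogue go to the shadow of the stack: the shape survives. -/
theorem Shape.storesMem {F : Forest} {R : Rd} {mem : Mem} (h : Shape F R mem) (hcur : R.cur + 16 ≤ 0x800000)
    (hg : F.gif + 120 ≤ 0xC00000) (hp : F.pv + 24936 ≤ 0xC00000) (hst : ∀ o, o ∈ F.structs → o.1 + o.2 ≤ 0xC00000)
    (g0 n : Nat) (ss : List ShadowStore) (hin : ∀ s, s ∈ ss → s.idx + s.width ≤ n) (h2 : g0 + n ≤ 0x200000) :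
    Shape F R (Asan.storesMem mem g0 ss) := by
  have hse := Asan.storesMem_sameExcept mem g0 n ss hin h2
  have hk : ∀ lo hi, hi ≤ 0xC00000 → Mem.EqOn lo hi mem (Asan.storesMem mem g0 ss) := by
    intro lo hi hhi
    apply hse.eqOn
    intro w hw
    have e := List.mem_singleton.mp hw
    rw [e]
    simp only
    omega
  have hkept : F.Kept R mem (Asan.storesMem mem g0 ss) := by
    refine ⟨?_, ?_, ?_, ?_, ?_, ?_, ?_, ?_⟩
    · exact hk _ _ (by omega)
    · exact hk _ _ (by omega)
    · exact hk _ _ (by omega)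
    · exact hk _ _ (by omega)
    · exact hk _ _ (by omega)
    · exact hk _ _ (by omega)
    · exact hk _ _ (by omega)
    · intro o ho
      exact hk _ _ (hst o ho)
  apply h.frame hkept
  · intro o ho
    have := hst o ho
    omega
  · omega
  · omega
  · omega

/-- The same for the state invariant (where the objects are: from `Owns` and the heap's invariant). -/
theorem GifOK.storesMem {H : Heap} {F : Forest} {R : Rd} {mem : Mem} (h : GifOK H F R mem) (hok : HeapOK H mem)
    (hcur : R.cur + 16 ≤ 0x800000) (g0 n : Nat) (ss : List ShadowStore) (hin : ∀ s, s ∈ ss → s.idx + s.width ≤ n)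
    (h2 : g0 + n ≤ 0x200000) : GifOK H F R (Asan.storesMem mem g0 ss) := by
  refine ⟨h.owns, h.shape.storesMem hcur ?_ ?_ ?_ g0 n ss hin h2⟩
  · have hi := h.owns.inside hok (o := (F.gif, 120)) List.mem_cons_self
    simp only at hi
    omega
  · have hi := h.owns.inside hok (o := (F.pv, 24936)) (List.mem_cons_of_mem _ List.mem_cons_self)
    simp only at hi
    omega
  · intro o ho
    obtain ⟨m, hm, hle⟩ := h.shape.structs_owned o ho
    have hi := h.owns.inside hok hm
    simp only at hi
    omega

end Gif.Spec
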